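-- pv_equiv track=rewrite | github.com/pikalaw/algorithm | compress_2d_array.py | compress_2d
-- ===== SOURCE A (Python) =====
-- from typing import List, Tuple
--
-- def linearize(mat: List[List[int]]):
--   for i in range(len(mat)):
--     for j in range(len(mat[i])):
--       yield ((i, j), mat[i][j])
--
-- def find_twins_with_prev(cell: Tuple[int, int], mat: List[List[int]]):
--   pending = [cell]
--   visited = [[False for _ in range(len(mat[0]))] for _ in range(len(mat))]
--   twins = [cell]
--   prev_value = None
--   while pending:
--     i, j = pending.pop()
--     for k in range(len(mat[i])):
--       if k == j:
--         continue
--       if visited[i][k]: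
--         continue
--       visited[i][k] = True
--       if mat[i][k] < mat[i][j] and (
--           prev_value is None or mat[i][k] > prev_value):
--         prev_value = mat[i][k]
--       if mat[i][k] == mat[i][j]:
--         pending.append((i,k))
--         twins.append((i,k))
--     for k in range(len(mat)):
--       if k == i:
--         continue
--       if visited[k][j]:
--         continue
--       visited[k][j] = True
--       if mat[k][j] < mat[i][j] and (
--           prev_value is None or mat[k][j] > prev_value):
--         prev_value = mat[k][j]
--       if mat[k][j] == mat[i][j]:
--         pending.append((k,j))
--         twins.append((k,j))
--   return twins, prev_value
--
-- def compress_2d(mat: List[List[int]]):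
--   done_cells = set()
--   for cell, value in sorted(linearize(mat), key=lambda x: x[1]):
--     if cell in done_cells:
--       continue
--     twins, prev_value = find_twins_with_prev(cell, mat)
--     for twin in twins:
--       mat[twin[0]][twin[1]] = prev_value + 1 if prev_value is not None else 1
--       done_cells.add(twin)
--   return mat
-- ===== SOURCE B (Python) =====
-- # B: flat-array reformulation — the matrix is flattened to one list indexed by u
-- # (row u//m, col u%m); each group's component is grown by whole-array fixpoint sweeps
-- # over boolean row/column activity arrays, the previous rank by a separate max pass,
-- # instead of A's per-cell stack flood fill on nested lists with a visited matrix and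
-- # a running maximum.  Same in-place mutation of mat as A; objective: alternative.
-- def compress_2d(mat):
--     n = len(mat)
--     m = len(mat[0]) if mat else 0
--     flat = [x for row in mat for x in row]
--     done = [False] * (n * m)
--     for s in sorted(range(n * m), key=lambda u: flat[u]):
--         if done[s]:
--             continue
--         v = flat[s]
--         comp = [False] * (n * m)
--         comp[s] = True
--         rowact = [False] * n
--         colact = [False] * m
--         rowact[s // m] = True
--         colact[s % m] = True
--         changed = True
--         while changed:
--             changed = False
--             for u in range(n * m):
--                 if flat[u] == v and not comp[u] and (rowact[u // m] or colact[u % m]):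
--                     comp[u] = True
--                     rowact[u // m] = True
--                     colact[u % m] = True
--                     changed = True
--         prev = None
--         for u in range(n * m):
--             if flat[u] < v and (rowact[u // m] or colact[u % m]):
--                 if prev is None or flat[u] > prev:
--                     prev = flat[u]
--         nv = 1 if prev is None else prev + 1
--         for u in range(n * m):
--             if comp[u]:
--                 flat[u] = nv
--                 done[u] = True
--     for i in range(n):
--         mat[i][:] = flat[i * m:i * m + m]
--     return mat
-- ===== Notes on version B (the rewrite author's own statement) =====
-- stated objective: alternative
-- what changed: B flattens the matrix to a single array indexed by u (row u//m, col u%m) and ranks each group by whole-array fixpoint sweeps over boolean row/column activity arrays plus a separate max pass, instead of A's per-cell stack flood fill on nested lists with a visited matrix and a running maximum.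
import Mathlib
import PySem

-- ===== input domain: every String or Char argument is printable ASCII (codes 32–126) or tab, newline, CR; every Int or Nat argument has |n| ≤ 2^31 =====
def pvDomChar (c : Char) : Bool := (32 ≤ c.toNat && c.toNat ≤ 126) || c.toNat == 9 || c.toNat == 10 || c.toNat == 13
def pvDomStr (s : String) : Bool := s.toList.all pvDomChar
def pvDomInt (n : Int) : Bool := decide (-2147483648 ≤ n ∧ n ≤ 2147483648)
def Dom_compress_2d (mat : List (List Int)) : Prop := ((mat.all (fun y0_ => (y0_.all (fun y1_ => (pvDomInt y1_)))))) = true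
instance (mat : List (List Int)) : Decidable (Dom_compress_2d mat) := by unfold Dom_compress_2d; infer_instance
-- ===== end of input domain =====

-- B flattens the matrix to one array indexed by u (row u / m, col u % m) and grows each
-- group's component by whole-array fixpoint sweeps over boolean row/column activity arrays,
-- with a separate max pass for the previous rank, instead of A's per-cell stack flood fill
-- on nested lists with a visited matrix and a running maximum; objective: alternative.
-- Both A and B mutate `mat` in place in Python; the equivalence proved here is about the
-- RETURN value only.

-- ===== PORT A =====
-- cells are (row, col) pairs of Nats (Python's range indices are non-negative)
structure AState where
  pending : List (Nat × Nat)   -- Python's stack with its top at the HEAD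
  vis : List (List Bool)
  twins : List (Nat × Nat)
  prev : Option Int
deriving Repr

def matVal (mat : List (List Int)) (c : Nat × Nat) : Int := (mat.getD c.1 []).getD c.2 0

-- visited[i][k]; an out-of-range read yields `true` (= skip): Python raises there, which
-- Pre_compress_2d excludes (rectangular input keeps every read in range)
def vread (vis : List (List Bool)) (c : Nat × Nat) : Bool := ((vis.getD c.1 [])[c.2]?).getD true

def vset (vis : List (List Bool)) (c : Nat × Nat) : List (List Bool) :=
  vis.set c.1 ((vis.getD c.1 []).set c.2 true)

def countFalse (vis : List (List Bool)) : Nat := (vis.map (fun r => r.count false)).sum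

-- loop body shared by the row scan and the column scan (Python repeats it verbatim)
def scanStep (mat : List (List Int)) (cur c : Nat × Nat) (s : AState) : AState :=
  if vread s.vis c then s else
  let vis := vset s.vis c
  let prev := if decide (matVal mat c < matVal mat cur) &&
      (match s.prev with | none => true | some p => decide (matVal mat c > p)) then
        some (matVal mat c) else s.prev
  if matVal mat c = matVal mat cur then
    { pending := c :: s.pending, vis := vis, twins := s.twins ++ [c], prev := prev }
  else
    { s with vis := vis, prev := prev }

def rowScan (mat : List (List Int)) (i j : Nat) (s : AState) : AState :=
  (List.range (mat.getD i []).length).foldl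
    (fun s k => if k = j then s else scanStep mat (i, j) (i, k) s) s

def colScan (mat : List (List Int)) (i j : Nat) (s : AState) : AState :=
  (List.range mat.length).foldl
    (fun s k => if k = i then s else scanStep mat (i, j) (k, j) s) s

def ameasure (s : AState) : Nat := s.pending.length + 2 * countFalse s.vis

-- the while loop, run on fuel `ameasure s + 1`; the fuel strictly exceeds the number of
-- remaining iterations at every reachable state (proved below), so fuel 0 is never hit
def findLoop (mat : List (List Int)) : Nat → AState → List (Nat × Nat) × Option Int
  | 0, s => (s.twins, s.prev)
  | n + 1, s =>
      match s.pending with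
      | [] => (s.twins, s.prev)
      | (i, j) :: rest =>
          findLoop mat n (colScan mat i j (rowScan mat i j { s with pending := rest }))

def find_twins_with_prev (cell : Nat × Nat) (mat : List (List Int)) :
    List (Nat × Nat) × Option Int :=
  let s : AState :=
    { pending := [cell],
      vis := List.replicate mat.length (List.replicate (mat.headD []).length false),
      twins := [cell], prev := none }
  findLoop mat (ameasure s + 1) s

def linearize (mat : List (List Int)) : List ((Nat × Nat) × Int) :=
  (List.range mat.length).flatMap (fun i =>
    (List.range (mat.getD i []).length).map (fun j => ((i, j), (mat.getD i []).getD j 0)))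

def msetv (mat : List (List Int)) (c : Nat × Nat) (x : Int) : List (List Int) :=
  mat.set c.1 ((mat.getD c.1 []).set c.2 x)

def compress_2d (mat : List (List Int)) : List (List Int) :=
  ((PySem.List.sorted (linearize mat) (fun x => x.2)).foldl
    (fun (st : List (List Int) × PySem.Set (Nat × Nat)) cv =>
      if st.2.contains cv.1 then st else
      let tp := find_twins_with_prev cv.1 st.1
      tp.1.foldl
        (fun st2 twin =>
          (msetv st2.1 twin (match tp.2 with | some p => p + 1 | none => 1),
           st2.2.add twin)) st)
    (mat, PySem.Set.empty)).1

-- ===== PORT B =====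
-- flat[u] with default 0 (every proved access is in range)
def fget (l : List Int) (u : Nat) : Int := l.getD u 0

-- boolean array read with default false (an out-of-range read never occurs on Pre_)
def fbit (l : List Bool) (u : Nat) : Bool := l.getD u false

structure FState where
  comp : List Bool
  rowact : List Bool
  colact : List Bool
  changed : Bool
deriving Repr

-- body of B's inner for-loop over flat indices
def fstep (flat : List Int) (v : Int) (m : Nat) (st : FState) (u : Nat) : FState :=
  if fget flat u = v ∧ fbit st.comp u = false ∧
      (fbit st.rowact (u / m) ∨ fbit st.colact (u % m)) then
    { comp := st.comp.set u true, rowact := st.rowact.set (u / m) true,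
      colact := st.colact.set (u % m) true, changed := true }
  else st

def fSweep (flat : List Int) (v : Int) (nm m : Nat) (st : FState) : FState :=
  (List.range nm).foldl (fstep flat v m) st

-- the while loop, run on fuel `comp.count false + 1`; every sweep that reports a change
-- turns at least one comp entry from false to true (proved below), so fuel 0 is never hit
def fLoop (flat : List Int) (v : Int) (nm m : Nat) : Nat → FState → FState
  | 0, st => st
  | k + 1, st =>
      if (fSweep flat v nm m { st with changed := false }).changed then
        fLoop flat v nm m k (fSweep flat v nm m { st with changed := false })
      else fSweep flat v nm m { st with changed := false }

def fPrev (flat : List Int) (v : Int) (nm m : Nat) (rowact colact : List Bool) : Option Int :=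
  (List.range nm).foldl
    (fun (acc : Option Int) u =>
      if fget flat u < v ∧ (fbit rowact (u / m) ∨ fbit colact (u % m)) then
        match acc with
        | none => some (fget flat u)
        | some p => if fget flat u > p then some (fget flat u) else some p
      else acc) none

-- body of B's outer loop (one group: skip test, closure, prev, write-back)
def stepF (n m : Nat) (st : List Int × List Bool) (s : Nat) : List Int × List Bool :=
  if fbit st.2 s then st else
  let v := fget st.1 s
  let st0 : FState :=
    { comp := (List.replicate (n * m) false).set s true,
      rowact := (List.replicate n false).set (s / m) true,
      colact := (List.replicate m false).set (s % m) true,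
      changed := true }
  let cl := fLoop st.1 v (n * m) m (st0.comp.count false + 1) st0
  let nv := match fPrev st.1 v (n * m) m cl.rowact cl.colact with
            | none => (1 : Int) | some p => p + 1
  (List.range (n * m)).foldl
    (fun (st2 : List Int × List Bool) u =>
      if fbit cl.comp u then (st2.1.set u nv, st2.2.set u true) else st2) st

def compress_2d_alt (mat : List (List Int)) : List (List Int) :=
  let n := mat.length
  let m := (mat.headD []).length
  let flat0 := mat.flatten
  let res := (PySem.List.sorted (List.range (n * m)) (fun u => fget flat0 u)).foldl
    (stepF n m) (flat0, List.replicate (n * m) false)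
  (List.range n).map (fun i =>
    PySem.List.slice res.1 (some ((i * m : Nat) : Int)) (some (((i * m : Nat) : Int) + ((m : Nat) : Int))))

-- ===== PRECONDITION & SPEC =====
-- Pre_ excludes exactly the ragged (non-rectangular) matrices, on which A raises IndexError.
def Pre_compress_2d (mat : List (List Int)) : Prop :=
  ∀ r ∈ mat, r.length = (mat.headD []).length
instance (mat : List (List Int)) : Decidable (Pre_compress_2d mat) := by
  unfold Pre_compress_2d; infer_instance

def pvWitness_compress_2d : List (List Int) := [[1, 2], [3, 4]]

def Spec_compress_2d (mat : List (List Int)) (out : List (List Int)) : Prop :=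
  out = compress_2d_alt mat
instance (mat : List (List Int)) (out : List (List Int)) : Decidable (Spec_compress_2d mat out) := by
  unfold Spec_compress_2d; infer_instance

-- ===== CLAIM (what is proved, stated in full; the proofs are below) =====
def Claim_equal_compress_2d : Prop :=
  ∀ (mat : List (List Int)), Dom_compress_2d mat → Pre_compress_2d mat →
    Spec_compress_2d mat (compress_2d mat)

-- ===== LEMMAS AND PROOFS =====


-- ---------- spec-level notions ----------

def cells (mat : List (List Int)) : List (Nat × Nat) :=
  (List.range mat.length).flatMap (fun i =>
    (List.range (mat.getD i []).length).map (fun j => (i, j)))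

def nCols (mat : List (List Int)) : Nat := (mat.headD []).length

def inRM (mat : List (List Int)) (c : Nat × Nat) : Prop :=
  c.1 < mat.length ∧ c.2 < nCols mat

def sameLine (t c : Nat × Nat) : Prop := t.1 = c.1 ∨ t.2 = c.2

def touches (L : List (Nat × Nat)) (c : Nat × Nat) : Prop := ∃ t ∈ L, sameLine t c

def ClosedM (mat : List (List Int)) (v : Int) (T : Nat × Nat → Prop) : Prop :=
  ∀ t, T t → ∀ c, inRM mat c → matVal mat c = v → sameLine t c → T c

def IsComp (mat : List (List Int)) (v : Int) (start : Nat × Nat)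
    (L : List (Nat × Nat)) : Prop :=
  start ∈ L ∧ (∀ c ∈ L, inRM mat c ∧ matVal mat c = v) ∧ ClosedM mat v (· ∈ L) ∧
    (∀ T : Nat × Nat → Prop, T start → ClosedM mat v T → ∀ c ∈ L, T c)

def omax (acc : Option Int) (x : Int) : Option Int :=
  match acc with | none => some x | some p => some (max p x)

def listMax (l : List Int) : Option Int := l.foldl omax none

def touchesB (L : List (Nat × Nat)) (c : Nat × Nat) : Bool :=
  L.any (fun t => t.1 == c.1 || t.2 == c.2)

theorem touchesB_iff (L : List (Nat × Nat)) (c : Nat × Nat) :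
    touchesB L c = true ↔ touches L c := by
  unfold touchesB touches sameLine
  simp

def prevSpec (mat : List (List Int)) (v : Int) (L : List (Nat × Nat)) : Option Int :=
  listMax ((L.filter (fun c => decide (matVal mat c < v))).map (matVal mat))

def groupPrev (mat : List (List Int)) (v : Int) (L : List (Nat × Nat)) : Option Int :=
  prevSpec mat v ((cells mat).filter (fun c => touchesB L c))

-- ---------- listMax ----------

theorem foldl_omax_some (l : List Int) (a : Int) :
    l.foldl omax (some a) = some (l.foldl max a) := by
  induction l generalizing a with
  | nil => rfl
  | cons x l ih => simp [List.foldl, omax, ih]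

theorem listMax_cons (x : Int) (l : List Int) : listMax (x :: l) = some (l.foldl max x) := by
  simp [listMax, List.foldl, omax, foldl_omax_some]

theorem foldl_max_le (l : List Int) (a : Int) :
    a ≤ l.foldl max a ∧ (∀ y ∈ l, y ≤ l.foldl max a) := by
  induction l generalizing a with
  | nil => simp
  | cons x l ih =>
    have h := ih (max a x)
    refine ⟨le_trans (le_max_left a x) h.1, ?_⟩
    intro y hy
    rcases List.mem_cons.1 hy with rfl | hy
    · exact le_trans (le_max_right a y) h.1
    · exact h.2 y hy

theorem foldl_max_mem (l : List Int) (a : Int) :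
    l.foldl max a = a ∨ l.foldl max a ∈ l := by
  induction l generalizing a with
  | nil => simp
  | cons x l ih =>
    rcases ih (max a x) with h | h
    · rcases max_choice a x with hm | hm
      · left; simpa [List.foldl, hm] using h
      · right; simp only [List.foldl] at h ⊢; rw [h, hm]; exact List.mem_cons_self
    · right; exact List.mem_cons_of_mem _ h

theorem listMax_mem_le (l : List Int) (m : Int) (h : listMax l = some m) :
    m ∈ l ∧ ∀ y ∈ l, y ≤ m := by
  cases l with
  | nil => simp [listMax, List.foldl] at h
  | cons x l =>
    rw [listMax_cons] at h
    injection h with h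
    subst h
    have h1 := foldl_max_le l x
    have h2 := foldl_max_mem l x
    constructor
    · rcases h2 with h2 | h2
      · rw [h2]; exact List.mem_cons_self
      · exact List.mem_cons_of_mem _ h2
    · intro y hy
      rcases List.mem_cons.1 hy with rfl | hy
      · exact h1.1
      · exact h1.2 y hy

theorem listMax_congr {l l' : List Int} (h : ∀ x, x ∈ l ↔ x ∈ l') :
    listMax l = listMax l' := by
  cases hl : listMax l with
  | none =>
    cases hl' : listMax l' with
    | none => rfl
    | some m' =>
      exfalso
      have hm' := (listMax_mem_le l' m' hl').1
      have : m' ∈ l := (h m').2 hm'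
      cases l with
      | nil => simp at this
      | cons x t => rw [listMax_cons] at hl; simp at hl
  | some m =>
    cases hl' : listMax l' with
    | none =>
      exfalso
      have hm := (listMax_mem_le l m hl).1
      have : m ∈ l' := (h m).1 hm
      cases l' with
      | nil => simp at this
      | cons x t => rw [listMax_cons] at hl'; simp at hl'
    | some m' =>
      have h1 := listMax_mem_le l m hl
      have h2 := listMax_mem_le l' m' hl'
      have hle : m ≤ m' := h2.2 m ((h m).1 h1.1)
      have hge : m' ≤ m := h1.2 m' ((h m').2 h2.1)
      rw [le_antisymm hle hge]

theorem foldl_max_comm (t : List Int) (x y : Int) :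
    t.foldl max (max x y) = max x (t.foldl max y) := by
  induction t generalizing y with
  | nil => rfl
  | cons z t ih =>
    simp only [List.foldl]
    rw [max_assoc, ih]

theorem listMax_cons_omax (x : Int) (l : List Int) :
    listMax (x :: l) = omax (listMax l) x := by
  cases l with
  | nil => rfl
  | cons y t =>
    rw [listMax_cons, listMax_cons]
    simp only [List.foldl_cons, omax]
    rw [foldl_max_comm, max_comm]

theorem prevSpec_congr (mat : List (List Int)) (v : Int) {L L' : List (Nat × Nat)}
    (h : ∀ x, x ∈ L ↔ x ∈ L') : prevSpec mat v L = prevSpec mat v L' := by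
  unfold prevSpec
  apply listMax_congr
  intro x
  simp only [List.mem_map, List.mem_filter]
  constructor
  · rintro ⟨c, ⟨hc, hv⟩, rfl⟩; exact ⟨c, ⟨(h c).1 hc, hv⟩, rfl⟩
  · rintro ⟨c, ⟨hc, hv⟩, rfl⟩; exact ⟨c, ⟨(h c).2 hc, hv⟩, rfl⟩

theorem groupPrev_congr (mat : List (List Int)) (v : Int) {L L' : List (Nat × Nat)}
    (h : ∀ x, x ∈ L ↔ x ∈ L') : groupPrev mat v L = groupPrev mat v L' := by
  unfold groupPrev
  apply prevSpec_congr
  intro x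
  simp only [List.mem_filter, touchesB_iff, touches]
  constructor
  · rintro ⟨hx, t, ht, hl⟩; exact ⟨hx, t, (h t).1 ht, hl⟩
  · rintro ⟨hx, t, ht, hl⟩; exact ⟨hx, t, (h t).2 ht, hl⟩

-- ---------- cells / rectangular matrices ----------

theorem mem_cells (mat : List (List Int)) (c : Nat × Nat) :
    c ∈ cells mat ↔ c.1 < mat.length ∧ c.2 < (mat.getD c.1 []).length := by
  unfold cells
  rcases c with ⟨i, j⟩
  simp only [List.mem_flatMap, List.mem_map, List.mem_range]
  constructor
  · rintro ⟨i', hi', j', hj', h⟩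
    obtain ⟨rfl, rfl⟩ : i' = i ∧ j' = j := by
      constructor <;> [exact congrArg Prod.fst h; exact congrArg Prod.snd h]
    exact ⟨hi', hj'⟩
  · rintro ⟨hi, hj⟩
    exact ⟨i, hi, j, hj, rfl⟩

theorem rowlen (mat : List (List Int)) (hrect : ∀ r ∈ mat, r.length = (mat.headD []).length)
    {i : Nat} (hi : i < mat.length) : (mat.getD i []).length = nCols mat := by
  have h1 : mat.getD i [] = mat[i] := List.getD_eq_getElem mat [] hi
  rw [h1]
  exact hrect _ (List.getElem_mem hi)

theorem mem_cells_inR (mat : List (List Int))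
    (hrect : ∀ r ∈ mat, r.length = (mat.headD []).length) (c : Nat × Nat) :
    c ∈ cells mat ↔ inRM mat c := by
  rw [mem_cells]
  unfold inRM
  constructor
  · rintro ⟨h1, h2⟩; exact ⟨h1, by rwa [rowlen mat hrect h1] at h2⟩
  · rintro ⟨h1, h2⟩; exact ⟨h1, by rwa [rowlen mat hrect h1]⟩

-- ---------- visited matrix ----------

def VDims (mat : List (List Int)) (vis : List (List Bool)) : Prop :=
  vis.length = mat.length ∧ ∀ r ∈ vis, r.length = nCols mat

theorem vdims_rowlen (mat : List (List Int)) (vis : List (List Bool)) (h : VDims mat vis)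
    {i : Nat} (hi : i < vis.length) : (vis.getD i []).length = nCols mat := by
  have h1 : vis.getD i [] = vis[i] := List.getD_eq_getElem vis [] hi
  rw [h1]
  exact h.2 _ (List.getElem_mem hi)

theorem vdims_vset (mat : List (List Int)) (vis : List (List Bool)) (c : Nat × Nat)
    (h : VDims mat vis) : VDims mat (vset vis c) := by
  by_cases hc : c.1 < vis.length
  · unfold vset
    refine ⟨by simpa using h.1, ?_⟩
    intro r hr
    rcases List.mem_or_eq_of_mem_set hr with hr | rfl
    · exact h.2 _ hr
    · rw [List.length_set, vdims_rowlen mat vis h hc]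
  · unfold vset
    rw [List.set_eq_of_length_le (Nat.le_of_not_lt hc)]
    exact h

theorem vread_vset_self (mat : List (List Int)) (vis : List (List Bool)) (c : Nat × Nat)
    (hd : VDims mat vis) (hc : inRM mat c) : vread (vset vis c) c = true := by
  have h1 : c.1 < vis.length := by rw [hd.1]; exact hc.1
  have h2 : c.2 < (vis.getD c.1 []).length := by rw [vdims_rowlen mat vis hd h1]; exact hc.2
  unfold vread vset
  have h2' : c.2 < vis[c.1].length := by
    simpa [List.getD, List.getElem?_eq_getElem h1] using h2
  simp [List.getD, h1, h2']

theorem vread_vset_ne (vis : List (List Bool)) (c x : Nat × Nat) (hx : x ≠ c) :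
    vread (vset vis c) x = vread vis x := by
  by_cases h1 : x.1 = c.1
  · have h2 : x.2 ≠ c.2 := fun h2 => hx (Prod.ext h1 h2)
    by_cases hc : c.1 < vis.length
    · unfold vread vset
      have hg : (vis.set c.1 ((vis.getD c.1 []).set c.2 true)).getD x.1 [] =
          (vis.getD c.1 []).set c.2 true := by
        rw [h1]
        have := List.getD_eq_getElem (vis.set c.1 ((vis.getD c.1 []).set c.2 true)) []
          (by simpa using hc)
        rw [this]
        simp [hc]
      rw [hg, List.getElem?_set_ne (fun h => h2 (h.symm)), h1]
    · unfold vset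
      rw [List.set_eq_of_length_le (Nat.le_of_not_lt hc)]
  · unfold vread vset
    have hg : (vis.set c.1 ((vis.getD c.1 []).set c.2 true)).getD x.1 [] = vis.getD x.1 [] := by
      unfold List.getD
      rw [List.getElem?_set_ne (fun h => h1 (h.symm))]
    rw [hg]

-- ---------- measure facts ----------

theorem count_set_true (row : List Bool) (j : Nat) (hj : j < row.length)
    (h : row[j] = false) : (row.set j true).count false + 1 = row.count false := by
  induction row generalizing j with
  | nil => simp at hj
  | cons b row ih =>
    cases j with
    | zero => simp at h; simp [h]
    | succ j =>
      simp only [List.set_cons_succ, List.count_cons]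
      have := ih j (by simpa using hj) (by simpa using h)
      omega

theorem countFalse_set (vis : List (List Bool)) (i : Nat) (r' : List Bool)
    (hi : i < vis.length) :
    countFalse (vis.set i r') + vis[i].count false = countFalse vis + r'.count false := by
  induction vis generalizing i with
  | nil => simp at hi
  | cons r vis ih =>
    cases i with
    | zero => simp [countFalse]; omega
    | succ i =>
      simp only [List.set_cons_succ, countFalse, List.map_cons, List.sum_cons]
      have := ih i (by simpa using hi)
      simp only [countFalse] at this
      simp at this ⊢
      omega

theorem vread_false_inbounds (vis : List (List Bool)) (c : Nat × Nat)
    (h : vread vis c = false) :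
    c.1 < vis.length ∧ c.2 < (vis.getD c.1 []).length ∧ (vis.getD c.1 [])[c.2]? = some false := by
  unfold vread at h
  have h2 : (vis.getD c.1 [])[c.2]? = some false := by
    cases hg : (vis.getD c.1 [])[c.2]? with
    | none => rw [hg] at h; simp at h
    | some b => rw [hg] at h; simp at h; rw [h]
  have h3 : c.2 < (vis.getD c.1 []).length := by
    by_contra hlt
    rw [List.getElem?_eq_none (Nat.le_of_not_lt hlt)] at h2
    simp at h2
  have h1 : c.1 < vis.length := by
    by_contra hlt
    rw [List.getD_eq_default _ _ (Nat.le_of_not_lt hlt)] at h3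
    simp at h3
  exact ⟨h1, h3, h2⟩

theorem countFalse_vset (vis : List (List Bool)) (c : Nat × Nat)
    (h : vread vis c = false) : countFalse (vset vis c) + 1 = countFalse vis := by
  obtain ⟨h1, h3, h2⟩ := vread_false_inbounds vis c h
  unfold vset
  have hrow : vis.getD c.1 [] = vis[c.1] := List.getD_eq_getElem vis [] h1
  have hset := countFalse_set vis c.1 ((vis.getD c.1 []).set c.2 true) h1
  have hcnt : ((vis.getD c.1 []).set c.2 true).count false + 1 = (vis.getD c.1 []).count false := by
    apply count_set_true _ _ h3
    have := List.getElem?_eq_getElem h3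
    rw [this] at h2
    exact Option.some.inj h2
  rw [← hrow] at hset
  omega

theorem scanStep_measure (mat : List (List Int)) (cur c : Nat × Nat) (s : AState) :
    ameasure (scanStep mat cur c s) ≤ ameasure s := by
  unfold scanStep
  by_cases hv : vread s.vis c
  · simp [hv]
  · have hb : vread s.vis c = false := by simpa using hv
    have hc := countFalse_vset s.vis c hb
    simp only [hb, Bool.false_eq_true, if_false]
    split <;> simp [ameasure] <;> omega

theorem foldl_ameasure_le (f : AState → Nat → AState)
    (hf : ∀ s k, ameasure (f s k) ≤ ameasure s) :
    ∀ (l : List Nat) (s : AState), ameasure (l.foldl f s) ≤ ameasure s := by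
  intro l
  induction l with
  | nil => intro s; simp
  | cons k l ih => intro s; exact le_trans (ih (f s k)) (hf s k)

theorem rowScan_measure (mat : List (List Int)) (i j : Nat) (s : AState) :
    ameasure (rowScan mat i j s) ≤ ameasure s := by
  unfold rowScan
  apply foldl_ameasure_le
  intro s k
  split
  · exact le_refl _
  · exact scanStep_measure mat (i, j) (i, k) s

theorem colScan_measure (mat : List (List Int)) (i j : Nat) (s : AState) :
    ameasure (colScan mat i j s) ≤ ameasure s := by
  unfold colScan
  apply foldl_ameasure_le
  intro s k
  split
  · exact le_refl _
  · exact scanStep_measure mat (i, j) (k, j) s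

-- ---------- A-side invariant ----------

def visCells (mat : List (List Int)) (vis : List (List Bool)) : List (Nat × Nat) :=
  (cells mat).filter (fun c => vread vis c)

def Scanned (mat : List (List Int)) (vis : List (List Bool)) (t : Nat × Nat) : Prop :=
  (∀ k, k < nCols mat → k ≠ t.2 → vread vis (t.1, k) = true) ∧
  (∀ k, k < mat.length → k ≠ t.1 → vread vis (k, t.2) = true)

structure AInv (mat : List (List Int)) (v : Int) (start : Nat × Nat)
    (ex : Nat × Nat → Prop) (s : AState) : Prop where
  hstart : start ∈ s.twins
  htw : ∀ c ∈ s.twins, inRM mat c ∧ matVal mat c = v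
  hpend : ∀ c ∈ s.pending, c ∈ s.twins
  hscan : ∀ c ∈ s.twins, c ∈ s.pending ∨ Scanned mat s.vis c ∨ ex c
  hvisT : ∀ c, inRM mat c → vread s.vis c = true → matVal mat c = v → c ∈ s.twins
  hvisTouch : ∀ c, inRM mat c → vread s.vis c = true → touches s.twins c
  hmin : ∀ T : Nat × Nat → Prop, T start → ClosedM mat v T → ∀ c ∈ s.twins, T c
  hprev : s.prev = prevSpec mat v (visCells mat s.vis)
  hdims : VDims mat s.vis

theorem prevSpec_cons (mat : List (List Int)) (v : Int) (c : Nat × Nat) (L : List (Nat × Nat)) :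
    prevSpec mat v (c :: L) =
      if matVal mat c < v then omax (prevSpec mat v L) (matVal mat c) else prevSpec mat v L := by
  unfold prevSpec
  by_cases h : matVal mat c < v
  · simp [h, listMax_cons_omax]
  · simp [h]

theorem code_prev_update (v x : Int) (p : Option Int) :
    (if decide (x < v) && (match p with | none => true | some q => decide (x > q)) then
      some x else p) = if x < v then omax p x else p := by
  cases p with
  | none =>
    by_cases h : x < v <;> simp [h, omax]
  | some q =>
    by_cases h : x < v
    · by_cases h2 : x > q
      · simp [h, h2, omax, max_eq_right (le_of_lt h2)]
      · have h3 : x ≤ q := by omega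
        simp [h, h2, omax, max_eq_left h3]
    · simp [h]

theorem Scanned_mono (mat : List (List Int)) (vis vis' : List (List Bool)) (t : Nat × Nat)
    (hmono : ∀ x, vread vis x = true → vread vis' x = true)
    (h : Scanned mat vis t) : Scanned mat vis' t :=
  ⟨fun k hk hne => hmono _ (h.1 k hk hne), fun k hk hne => hmono _ (h.2 k hk hne)⟩

theorem scanStep_inv (mat : List (List Int)) (v : Int) (start : Nat × Nat)
    (ex : Nat × Nat → Prop)
    (hrect : ∀ r ∈ mat, r.length = (mat.headD []).length)
    (s : AState) (inv : AInv mat v start ex s) (t c : Nat × Nat)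
    (ht : t ∈ s.twins) (hc : inRM mat c) (hline : sameLine t c) :
    AInv mat v start ex (scanStep mat t c s) ∧
    (∀ x, vread s.vis x = true → vread (scanStep mat t c s).vis x = true) ∧
    vread (scanStep mat t c s).vis c = true ∧
    (∀ x ∈ s.twins, x ∈ (scanStep mat t c s).twins) := by
  have htv : matVal mat t = v := (inv.htw t ht).2
  by_cases hv : vread s.vis c = true
  · rw [scanStep, if_pos hv]
    exact ⟨inv, fun x h => h, hv, fun x h => h⟩
  have hvc : vread s.vis c = false := by simpa using hv
  have hmono : ∀ x, vread s.vis x = true → vread (vset s.vis c) x = true := by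
    intro x hx
    by_cases hxc : x = c
    · rw [hxc] at hx; rw [hx] at hvc; exact absurd hvc (by simp)
    · rw [vread_vset_ne s.vis c x hxc]; exact hx
  have hselfv : vread (vset s.vis c) c = true := vread_vset_self mat s.vis c inv.hdims hc
  have hvisnew : ∀ x, vread (vset s.vis c) x = true → x = c ∨ vread s.vis x = true := by
    intro x hx
    by_cases hxc : x = c
    · exact Or.inl hxc
    · rw [vread_vset_ne s.vis c x hxc] at hx; exact Or.inr hx
  have hvcmem : ∀ x, x ∈ visCells mat (vset s.vis c) ↔ x ∈ c :: visCells mat s.vis := by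
    intro x
    simp only [visCells, List.mem_filter, List.mem_cons]
    constructor
    · rintro ⟨hx1, hx2⟩
      rcases hvisnew x hx2 with rfl | hx2
      · exact Or.inl rfl
      · exact Or.inr ⟨hx1, hx2⟩
    · rintro (rfl | ⟨hx1, hx2⟩)
      · exact ⟨(mem_cells_inR mat hrect x).2 hc, hselfv⟩
      · exact ⟨hx1, hmono x hx2⟩
  have hprevnew : (if decide (matVal mat c < matVal mat t) &&
        (match s.prev with | none => true | some p => decide (matVal mat c > p)) then
        some (matVal mat c) else s.prev) = prevSpec mat v (visCells mat (vset s.vis c)) := by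
    rw [prevSpec_congr mat v hvcmem, prevSpec_cons, htv, code_prev_update, inv.hprev]
  have hdims' := vdims_vset mat s.vis c inv.hdims
  rw [scanStep]
  rw [if_neg (by simp [hvc])]
  by_cases heq : matVal mat c = matVal mat t
  · rw [if_pos heq]
    have hcv : matVal mat c = v := heq.trans htv
    refine ⟨⟨?_, ?_, ?_, ?_, ?_, ?_, ?_, ?_, ?_⟩, hmono, hselfv, fun x hx => List.mem_append_left _ hx⟩
    · exact List.mem_append_left _ inv.hstart
    ·
      intro x hx
      rcases List.mem_append.1 hx with hx | hx
      · exact inv.htw x hx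
      · rcases List.mem_singleton.1 hx with rfl
        exact ⟨hc, hcv⟩
    ·
      intro x hx
      rcases List.mem_cons.1 hx with rfl | hx
      · exact List.mem_append_right _ (List.mem_singleton.2 rfl)
      · exact List.mem_append_left _ (inv.hpend x hx)
    ·
      intro x hx
      rcases List.mem_append.1 hx with hx | hx
      · rcases inv.hscan x hx with h | h | h
        · exact Or.inl (List.mem_cons_of_mem _ h)
        · exact Or.inr (Or.inl (Scanned_mono mat s.vis _ x hmono h))
        · exact Or.inr (Or.inr h)
      · rcases List.mem_singleton.1 hx with rfl
        exact Or.inl List.mem_cons_self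
    ·
      intro x hx1 hx2 hx3
      rcases hvisnew x hx2 with rfl | hx2
      · exact List.mem_append_right _ (List.mem_singleton.2 rfl)
      · exact List.mem_append_left _ (inv.hvisT x hx1 hx2 hx3)
    ·
      intro x hx1 hx2
      rcases hvisnew x hx2 with rfl | hx2
      · exact ⟨t, List.mem_append_left _ ht, hline⟩
      · obtain ⟨u, hu, hul⟩ := inv.hvisTouch x hx1 hx2
        exact ⟨u, List.mem_append_left _ hu, hul⟩
    ·
      intro T hT hcl x hx
      rcases List.mem_append.1 hx with hx | hx
      · exact inv.hmin T hT hcl x hx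
      · rcases List.mem_singleton.1 hx with rfl
        exact hcl t (inv.hmin T hT hcl t ht) x hc hcv hline
    · exact hprevnew
    · exact hdims'
  · rw [if_neg heq]
    have hcnv : matVal mat c ≠ v := fun h => heq (h.trans htv.symm)
    refine ⟨⟨?_, ?_, ?_, ?_, ?_, ?_, ?_, ?_, ?_⟩, hmono, hselfv, fun x hx => hx⟩
    · exact inv.hstart
    · exact inv.htw
    · exact inv.hpend
    ·
      intro x hx
      rcases inv.hscan x hx with h | h | h
      · exact Or.inl h
      · exact Or.inr (Or.inl (Scanned_mono mat s.vis _ x hmono h))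
      · exact Or.inr (Or.inr h)
    ·
      intro x hx1 hx2 hx3
      rcases hvisnew x hx2 with rfl | hx2
      · exact absurd hx3 hcnv
      · exact inv.hvisT x hx1 hx2 hx3
    ·
      intro x hx1 hx2
      rcases hvisnew x hx2 with rfl | hx2
      · exact ⟨t, ht, hline⟩
      · exact inv.hvisTouch x hx1 hx2
    · exact inv.hmin
    · exact hprevnew
    · exact hdims'

-- ---------- the scans and the while loop ----------

theorem scanFold_inv (mat : List (List Int)) (v : Int) (start : Nat × Nat)
    (ex : Nat × Nat → Prop)
    (hrect : ∀ r ∈ mat, r.length = (mat.headD []).length)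
    (t : Nat × Nat) (cellOf : Nat → Nat × Nat) (skip : Nat)
    (ks : List Nat)
    (hcell : ∀ k ∈ ks, inRM mat (cellOf k) ∧ sameLine t (cellOf k)) :
    ∀ s : AState, AInv mat v start ex s → t ∈ s.twins →
    AInv mat v start ex
        (ks.foldl (fun s k => if k = skip then s else scanStep mat t (cellOf k) s) s) ∧
      (∀ x, vread s.vis x = true →
        vread (ks.foldl (fun s k => if k = skip then s else scanStep mat t (cellOf k) s) s).vis x = true) ∧
      (∀ x ∈ s.twins,
        x ∈ (ks.foldl (fun s k => if k = skip then s else scanStep mat t (cellOf k) s) s).twins) ∧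
      (∀ k ∈ ks, k ≠ skip →
        vread (ks.foldl (fun s k => if k = skip then s else scanStep mat t (cellOf k) s) s).vis (cellOf k) = true) := by
  induction ks with
  | nil => intro s inv ht; exact ⟨inv, fun x h => h, fun x h => h, by simp⟩
  | cons k ks ih =>
    intro s inv ht
    simp only [List.foldl_cons]
    by_cases hk : k = skip
    · rw [if_pos hk]
      obtain ⟨h1, h2, h3, h4⟩ := ih (fun k hk => hcell k (List.mem_cons_of_mem _ hk)) s inv ht
      refine ⟨h1, h2, h3, ?_⟩
      intro k' hk' hne
      rcases List.mem_cons.1 hk' with rfl | hk'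
      · exact absurd hk hne
      · exact h4 k' hk' hne
    · rw [if_neg hk]
      obtain ⟨hc, hl⟩ := hcell k List.mem_cons_self
      obtain ⟨inv1, hmono1, hself1, htw1⟩ := scanStep_inv mat v start ex hrect s inv t _ ht hc hl
      obtain ⟨h1, h2, h3, h4⟩ := ih (fun k hk => hcell k (List.mem_cons_of_mem _ hk)) _ inv1
        (htw1 t ht)
      refine ⟨h1, fun x hx => h2 x (hmono1 x hx), fun x hx => h3 x (htw1 x hx), ?_⟩
      intro k' hk' hne
      rcases List.mem_cons.1 hk' with rfl | hk'
      · exact h2 _ hself1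
      · exact h4 k' hk' hne

theorem pop_step_inv (mat : List (List Int)) (v : Int) (start : Nat × Nat)
    (hrect : ∀ r ∈ mat, r.length = (mat.headD []).length)
    (s : AState) (i j : Nat) (rest : List (Nat × Nat))
    (hp : s.pending = (i, j) :: rest)
    (inv : AInv mat v start (fun _ => False) s) :
    AInv mat v start (fun _ => False)
      (colScan mat i j (rowScan mat i j { s with pending := rest })) := by
  have htij : (i, j) ∈ s.twins := inv.hpend _ (by rw [hp]; exact List.mem_cons_self)
  have hinR : inRM mat (i, j) := (inv.htw _ htij).1
  -- invariant with the popped cell as exception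
  have inv1 : AInv mat v start (fun c => c = (i, j)) { s with pending := rest } := by
    refine ⟨inv.hstart, inv.htw, ?_, ?_, inv.hvisT, inv.hvisTouch, inv.hmin, inv.hprev, inv.hdims⟩
    · intro c hc
      exact inv.hpend c (by rw [hp]; exact List.mem_cons_of_mem _ hc)
    · intro c hc
      rcases inv.hscan c hc with h | h | h
      · rw [hp] at h
        rcases List.mem_cons.1 h with rfl | h
        · exact Or.inr (Or.inr rfl)
        · exact Or.inl h
      · exact Or.inr (Or.inl h)
      · exact absurd h (fun h => h)
  have hrl : (mat.getD i []).length = nCols mat := rowlen mat hrect hinR.1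
  -- the row scan
  have hrow := scanFold_inv mat v start (fun c => c = (i, j)) hrect (i, j)
    (fun k => (i, k)) j (List.range (mat.getD i []).length)
    (by
      intro k hk
      rw [List.mem_range, hrl] at hk
      exact ⟨⟨hinR.1, hk⟩, Or.inl rfl⟩)
    { s with pending := rest } inv1 htij
  obtain ⟨inv2, hmono2, htwins2, hvisrow⟩ := hrow
  -- the column scan
  have hcol := scanFold_inv mat v start (fun c => c = (i, j)) hrect (i, j)
    (fun k => (k, j)) i (List.range mat.length)
    (by
      intro k hk
      rw [List.mem_range] at hk
      exact ⟨⟨hk, hinR.2⟩, Or.inr rfl⟩)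
    _ inv2 (htwins2 _ htij)
  obtain ⟨inv3, hmono3, htwins3, hviscol⟩ := hcol
  rw [rowScan, colScan] at *
  -- after both scans the popped cell is fully scanned
  have hscanned : Scanned mat
      ((List.range mat.length).foldl
        (fun s k => if k = i then s else scanStep mat (i, j) (k, j) s)
        ((List.range (mat.getD i []).length).foldl
          (fun s k => if k = j then s else scanStep mat (i, j) (i, k) s)
          { s with pending := rest })).vis (i, j) := by
    constructor
    · intro k hk hne
      apply hmono3
      exact hvisrow k (by rw [List.mem_range, hrl]; exact hk) hne
    · intro k hk hne
      exact hviscol k (by rw [List.mem_range]; exact hk) hne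
  exact ⟨inv3.hstart, inv3.htw, inv3.hpend,
    (by
      intro c hc
      rcases inv3.hscan c hc with h | h | h
      · exact Or.inl h
      · exact Or.inr (Or.inl h)
      · rw [h]; exact Or.inr (Or.inl hscanned)),
    inv3.hvisT, inv3.hvisTouch, inv3.hmin, inv3.hprev, inv3.hdims⟩

theorem final_inv (mat : List (List Int)) (v : Int) (start : Nat × Nat)
    (hrect : ∀ r ∈ mat, r.length = (mat.headD []).length)
    (s : AState) (inv : AInv mat v start (fun _ => False) s) (hp : s.pending = []) :
    IsComp mat v start s.twins ∧ s.prev = groupPrev mat v s.twins := by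
  have hsc : ∀ c ∈ s.twins, Scanned mat s.vis c := by
    intro c hc
    rcases inv.hscan c hc with h | h | h
    · rw [hp] at h; simp at h
    · exact h
    · exact absurd h (fun h => h)
  have hclosed : ClosedM mat v (· ∈ s.twins) := by
    intro t ht c hc hcv hline
    by_cases hct : c = t
    · rw [hct]; exact ht
    rcases hline with h1 | h2
    · by_cases h2 : t.2 = c.2
      · exact absurd (Prod.ext h1.symm h2.symm) hct
      · have hv := (hsc t ht).1 c.2 hc.2 (fun h => h2 h.symm)
        have : (t.1, c.2) = c := by rw [h1]
        rw [this] at hv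
        exact inv.hvisT c hc hv hcv
    · by_cases h1 : t.1 = c.1
      · exact absurd (Prod.ext h1.symm h2.symm) hct
      · have hv := (hsc t ht).2 c.1 hc.1 (fun h => h1 h.symm)
        have : (c.1, t.2) = c := by rw [h2]
        rw [this] at hv
        exact inv.hvisT c hc hv hcv
  refine ⟨⟨inv.hstart, inv.htw, hclosed, inv.hmin⟩, ?_⟩
  rw [inv.hprev]
  unfold prevSpec groupPrev prevSpec
  apply listMax_congr
  intro x
  simp only [List.mem_map, List.mem_filter, decide_eq_true_eq, visCells, touchesB_iff]
  constructor
  · rintro ⟨c, ⟨⟨hc1, hc2⟩, hc3⟩, rfl⟩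
    have hinr := (mem_cells_inR mat hrect c).1 hc1
    exact ⟨c, ⟨⟨hc1, inv.hvisTouch c hinr hc2⟩, hc3⟩, rfl⟩
  · rintro ⟨c, ⟨⟨hc1, ht'⟩, hc3⟩, rfl⟩
    obtain ⟨t, ht, hline⟩ := ht'
    have hinr := (mem_cells_inR mat hrect c).1 hc1
    have hct : c ≠ t := by
      intro h
      rw [h] at hc3
      rw [(inv.htw t ht).2] at hc3
      exact lt_irrefl v hc3
    have hv : vread s.vis c = true := by
      rcases hline with h1 | h2
      · by_cases h2 : t.2 = c.2
        · exact absurd (Prod.ext h1.symm h2.symm) hct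
        · have hv := (hsc t ht).1 c.2 hinr.2 (fun h => h2 h.symm)
          have he : (t.1, c.2) = c := by rw [h1]
          rwa [he] at hv
      · by_cases h1 : t.1 = c.1
        · exact absurd (Prod.ext h1.symm h2.symm) hct
        · have hv := (hsc t ht).2 c.1 hinr.1 (fun h => h1 h.symm)
          have he : (c.1, t.2) = c := by rw [h2]
          rwa [he] at hv
    exact ⟨c, ⟨⟨hc1, hv⟩, hc3⟩, rfl⟩

theorem findLoop_spec (mat : List (List Int)) (v : Int) (start : Nat × Nat)
    (hrect : ∀ r ∈ mat, r.length = (mat.headD []).length) :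
    ∀ (n : Nat) (s : AState), ameasure s < n → AInv mat v start (fun _ => False) s →
      IsComp mat v start (findLoop mat n s).1 ∧
      (findLoop mat n s).2 = groupPrev mat v (findLoop mat n s).1 := by
  intro n
  induction n with
  | zero => intro s hm; omega
  | succ n ih =>
    intro s hm inv
    cases hp : s.pending with
    | nil =>
      have := final_inv mat v start hrect s inv hp
      simpa [findLoop, hp] using this
    | cons ij rest =>
      rcases ij with ⟨i, j⟩
      have hinv' := pop_step_inv mat v start hrect s i j rest hp inv
      have hm1 : ameasure (colScan mat i j (rowScan mat i j { s with pending := rest })) < n := by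
        have h1 := colScan_measure mat i j (rowScan mat i j { s with pending := rest })
        have h2 := rowScan_measure mat i j ({ s with pending := rest })
        have h3 : ameasure { s with pending := rest } + 1 = ameasure s := by
          simp [ameasure, hp]
          omega
        omega
      have := ih _ hm1 hinv'
      simpa [findLoop, hp] using this

theorem vread_replicate (n m : Nat) (c : Nat × Nat) (h1 : c.1 < n) (h2 : c.2 < m) :
    vread (List.replicate n (List.replicate m false)) c = false := by
  unfold vread
  have hg : (List.replicate n (List.replicate m false)).getD c.1 [] = List.replicate m false := by
    rw [List.getD_eq_getElem _ _ (by simpa using h1)]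
    simp
  rw [hg]
  rw [List.getElem?_eq_getElem (by simpa using h2)]
  simp

theorem find_twins_spec (mat : List (List Int)) (start : Nat × Nat)
    (hrect : ∀ r ∈ mat, r.length = (mat.headD []).length) (hin : inRM mat start) :
    IsComp mat (matVal mat start) start (find_twins_with_prev start mat).1 ∧
    (find_twins_with_prev start mat).2 =
      groupPrev mat (matVal mat start) (find_twins_with_prev start mat).1 := by
  set v := matVal mat start with hv
  have hdims0 : VDims mat (List.replicate mat.length (List.replicate (nCols mat) false)) := by
    constructor
    · simp
    · intro r hr
      rw [List.eq_of_mem_replicate hr]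
      simp
  have inv0 : AInv mat v start (fun _ => False)
      { pending := [start],
        vis := List.replicate mat.length (List.replicate (mat.headD []).length false),
        twins := [start], prev := none } := by
    refine ⟨List.mem_singleton.2 rfl, ?_, ?_, ?_, ?_, ?_, ?_, ?_, hdims0⟩
    · intro c hc; rw [List.mem_singleton.1 hc]; exact ⟨hin, rfl⟩
    · intro c hc; exact hc
    · intro c hc; rw [List.mem_singleton.1 hc]; exact Or.inl List.mem_cons_self
    · intro c hc hvr _
      exfalso
      have := vread_replicate mat.length (mat.headD []).length c hc.1 hc.2
      rw [this] at hvr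
      exact Bool.noConfusion hvr
    · intro c hc hvr
      exfalso
      have := vread_replicate mat.length (mat.headD []).length c hc.1 hc.2
      rw [this] at hvr
      exact Bool.noConfusion hvr
    · intro T hT _ c hc; rw [List.mem_singleton.1 hc]; exact hT
    · show (none : Option Int) = prevSpec mat v (visCells mat _)
      have : visCells mat (List.replicate mat.length (List.replicate (mat.headD []).length false)) = [] := by
        unfold visCells
        apply List.filter_eq_nil_iff.2
        intro c hc
        have hinr := (mem_cells_inR mat hrect c).1 hc
        simp only [Bool.not_eq_true]
        exact vread_replicate mat.length (mat.headD []).length c hinr.1 hinr.2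
      rw [this]
      rfl
  unfold find_twins_with_prev
  exact findLoop_spec mat v start hrect _ _ (Nat.lt_succ_self _) inv0

theorem IsComp_unique (mat : List (List Int)) (v : Int) (start : Nat × Nat)
    {L L' : List (Nat × Nat)} (h : IsComp mat v start L) (h' : IsComp mat v start L') :
    ∀ x, x ∈ L ↔ x ∈ L' :=
  fun x => ⟨fun hx => h.2.2.2 (· ∈ L') h'.1 h'.2.2.1 x hx,
            fun hx => h'.2.2.2 (· ∈ L) h.1 h.2.2.1 x hx⟩

-- ---------- matrix writes and extensionality ----------

def MDims (mat0 m : List (List Int)) : Prop :=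
  m.length = mat0.length ∧ ∀ i, (m.getD i []).length = (mat0.getD i []).length

theorem MDims_refl (m : List (List Int)) : MDims m m := ⟨rfl, fun _ => rfl⟩

theorem matVal_msetv_ne (m : List (List Int)) (c x : Nat × Nat) (nv : Int) (hx : x ≠ c) :
    matVal (msetv m c nv) x = matVal m x := by
  by_cases h1 : x.1 = c.1
  · have h2 : x.2 ≠ c.2 := fun h2 => hx (Prod.ext h1 h2)
    by_cases hc : c.1 < m.length
    · unfold matVal msetv
      have hg : (m.set c.1 ((m.getD c.1 []).set c.2 nv)).getD x.1 [] =
          (m.getD c.1 []).set c.2 nv := by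
        rw [h1]
        rw [List.getD_eq_getElem _ _ (by simpa using hc)]
        simp [hc]
      rw [hg]
      unfold List.getD
      rw [List.getElem?_set_ne (fun h => h2 h.symm), h1]
    · unfold msetv
      rw [List.set_eq_of_length_le (Nat.le_of_not_lt hc)]
  · unfold matVal msetv
    have hg : (m.set c.1 ((m.getD c.1 []).set c.2 nv)).getD x.1 [] = m.getD x.1 [] := by
      unfold List.getD
      rw [List.getElem?_set_ne (fun h => h1 h.symm)]
    rw [hg]

theorem matVal_msetv_self (m : List (List Int)) (c : Nat × Nat) (nv : Int)
    (h1 : c.1 < m.length) (h2 : c.2 < (m.getD c.1 []).length) :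
    matVal (msetv m c nv) c = nv := by
  unfold matVal msetv
  have hg : (m.set c.1 ((m.getD c.1 []).set c.2 nv)).getD c.1 [] =
      (m.getD c.1 []).set c.2 nv := by
    rw [List.getD_eq_getElem _ _ (by simpa using h1)]
    simp [h1]
  rw [hg]
  unfold List.getD
  rw [List.getElem?_set_self (by simpa using h2)]
  rfl

theorem msetv_dims (m : List (List Int)) (c : Nat × Nat) (nv : Int) :
    MDims m (msetv m c nv) := by
  unfold msetv
  constructor
  · simp
  · intro i
    by_cases hc : c.1 < m.length
    · by_cases hic : i = c.1
      · subst hic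
        rw [List.getD_eq_getElem _ _ (by simpa using hc)]
        simp [hc]
      · unfold List.getD
        rw [List.getElem?_set_ne (fun h => hic h.symm)]
    · rw [List.set_eq_of_length_le (Nat.le_of_not_lt hc)]

theorem writeA_spec (nv : Int) :
    ∀ (L : List (Nat × Nat)) (st : List (List Int) × PySem.Set (Nat × Nat)),
      (∀ c ∈ L, c.1 < st.1.length ∧ c.2 < (st.1.getD c.1 []).length) →
      MDims st.1 (L.foldl (fun st2 twin => (msetv st2.1 twin nv, st2.2.add twin)) st).1 ∧
      (∀ x, x ∉ L →
        matVal (L.foldl (fun st2 twin => (msetv st2.1 twin nv, st2.2.add twin)) st).1 x =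
          matVal st.1 x) ∧
      (∀ x ∈ L,
        matVal (L.foldl (fun st2 twin => (msetv st2.1 twin nv, st2.2.add twin)) st).1 x = nv) ∧
      (∀ x, x ∈ (L.foldl (fun st2 twin => (msetv st2.1 twin nv, st2.2.add twin)) st).2 ↔
        x ∈ st.2 ∨ x ∈ L) := by
  intro L
  induction L with
  | nil =>
    intro st _
    exact ⟨MDims_refl _, fun x _ => rfl, by simp, by simp⟩
  | cons c L ih =>
    intro st hin
    simp only [List.foldl_cons]
    have hc := hin c List.mem_cons_self
    have hdim := msetv_dims st.1 c nv
    obtain ⟨j1, j2, j3, j4⟩ := ih (msetv st.1 c nv, st.2.add c)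
      (by
        intro x hx
        have := hin x (List.mem_cons_of_mem _ hx)
        refine ⟨by rw [hdim.1]; exact this.1, by rw [hdim.2]; exact this.2⟩)
    refine ⟨⟨by rw [j1.1]; exact hdim.1, fun i => by rw [j1.2 i]; exact hdim.2 i⟩, ?_, ?_, ?_⟩
    · intro x hx
      have hxc : x ≠ c := fun h => hx (h ▸ List.mem_cons_self)
      have hxL : x ∉ L := fun h => hx (List.mem_cons_of_mem _ h)
      rw [j2 x hxL, matVal_msetv_ne st.1 c x nv hxc]
    · intro x hx
      rcases List.mem_cons.1 hx with rfl | hx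
      · by_cases hxL : x ∈ L
        · exact j3 x hxL
        · rw [j2 x hxL]
          exact matVal_msetv_self st.1 x nv hc.1 hc.2
      · exact j3 x hx
    · intro x
      rw [j4 x, PySem.Set.mem_add]
      constructor
      · rintro ((h | rfl) | h)
        · exact Or.inl h
        · exact Or.inr List.mem_cons_self
        · exact Or.inr (List.mem_cons_of_mem _ h)
      · rintro (h | h)
        · exact Or.inl (Or.inl h)
        · rcases List.mem_cons.1 h with rfl | h
          · exact Or.inl (Or.inr rfl)
          · exact Or.inr h

-- ---------- the common processing order ----------

theorem insertBy_map {α β : Type} (g : α → β) (ba : α → α → Bool) (bb : β → β → Bool)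
    (hb : ∀ x y, bb (g x) (g y) = ba x y) (x : α) :
    ∀ l : List α, PySem.List.insertBy bb (g x) (l.map g) = (PySem.List.insertBy ba x l).map g := by
  intro l
  induction l with
  | nil => simp [PySem.List.insertBy]
  | cons y l ih =>
    simp only [List.map_cons, PySem.List.insertBy, hb]
    by_cases h : ba x y
    · simp [h]
    · simp only [h, Bool.false_eq_true, if_false]
      rw [ih]
      simp

theorem foldl_insertBy_map {α β : Type} (g : α → β) (ba : α → α → Bool) (bb : β → β → Bool)
    (hb : ∀ x y, bb (g x) (g y) = ba x y) :
    ∀ (xs : List α) (acc : List α),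
      xs.foldl (fun acc x => PySem.List.insertBy bb (g x) acc) (acc.map g) =
      (xs.foldl (fun acc x => PySem.List.insertBy ba x acc) acc).map g := by
  intro xs
  induction xs with
  | nil => intro acc; rfl
  | cons x xs ih =>
    intro acc
    simp only [List.foldl_cons]
    rw [insertBy_map g ba bb hb x acc]
    exact ih _

theorem sorted_map_fst {α β κ : Type} [LT κ] [DecidableLT κ] (g : α → β) (key : β → κ)
    (xs : List α) :
    PySem.List.sorted (xs.map g) key =
      (PySem.List.sorted xs (fun a => key (g a))).map g := by
  rw [PySem.List.sorted_eq_foldl_insertBy, PySem.List.sorted_eq_foldl_insertBy]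
  rw [List.foldl_map]
  have := foldl_insertBy_map g (fun a b => decide (key (g a) < key (g b)))
    (fun a b => decide (key a < key b)) (fun x y => rfl) xs []
  simpa using this

theorem linearize_eq (mat : List (List Int)) :
    linearize mat = (cells mat).map (fun c => (c, matVal mat c)) := by
  unfold linearize cells
  rw [List.map_flatMap]
  apply List.flatMap_congr
  intro i _
  rw [List.map_map]
  rfl

theorem foldl_guard_omax {α : Type} (f : α → Int) (g : α → Prop) [DecidablePred g] :
    ∀ (l : List α) (acc : Option Int),
      l.foldl (fun acc c => if g c then omax acc (f c) else acc) acc =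
      ((l.filter (fun c => decide (g c))).map f).foldl omax acc := by
  intro l
  induction l with
  | nil => intro acc; rfl
  | cons x l ih =>
    intro acc
    by_cases hx : g x
    · rw [List.filter_cons_of_pos (by simpa using hx)]
      simp only [List.foldl_cons, List.map_cons, if_pos hx]
      exact ih _
    · rw [List.filter_cons_of_neg (by simpa using hx)]
      simp only [List.foldl_cons, if_neg hx]
      exact ih _

-- ---------- MDims transport ----------

theorem nCols_getD (m : List (List Int)) : nCols m = (m.getD 0 []).length := by
  cases m <;> rfl

theorem MDims_nCols {mat0 m : List (List Int)} (h : MDims mat0 m) : nCols m = nCols mat0 := by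
  rw [nCols_getD, nCols_getD, h.2]

theorem MDims_inR {mat0 m : List (List Int)} (h : MDims mat0 m) (c : Nat × Nat) :
    inRM m c ↔ inRM mat0 c := by
  unfold inRM
  rw [h.1, MDims_nCols h]

theorem MDims_rect {mat0 m : List (List Int)} (h : MDims mat0 m)
    (hrect : ∀ r ∈ mat0, r.length = (mat0.headD []).length) :
    ∀ r ∈ m, r.length = (m.headD []).length := by
  intro r hr
  obtain ⟨i, hi, rfl⟩ := List.getElem_of_mem hr
  show (m[i]).length = nCols m
  rw [MDims_nCols h]
  rw [← List.getD_eq_getElem m [] hi]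
  rw [h.2 i]
  have hi0 : i < mat0.length := by rw [← h.1]; exact hi
  rw [List.getD_eq_getElem mat0 [] hi0]
  exact hrect _ (List.getElem_mem hi0)

theorem MDims_comp {mat0 m m' : List (List Int)} (h1 : MDims mat0 m) (h2 : MDims m m') :
    MDims mat0 m' := ⟨h2.1.trans h1.1, fun i => (h2.2 i).trans (h1.2 i)⟩

theorem MDims_rows (mat0 m : List (List Int))
    (hrect : ∀ r ∈ mat0, r.length = (mat0.headD []).length)
    (h : MDims mat0 m) : ∀ r ∈ m, r.length = nCols mat0 := by
  intro r hr
  obtain ⟨i, hi, rfl⟩ := List.getElem_of_mem hr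
  rw [← List.getD_eq_getElem m [] hi, h.2 i]
  exact rowlen mat0 hrect (by rw [← h.1]; exact hi)

-- ---------- flat arrays: reads and writes ----------

theorem fbit_lt (l : List Bool) (u : Nat) (h : fbit l u = true) : u < l.length := by
  by_contra h'
  unfold fbit at h
  rw [List.getD_eq_default _ _ (Nat.le_of_not_lt h')] at h
  exact Bool.noConfusion h

theorem fbit_set_self (l : List Bool) (u : Nat) (h : u < l.length) :
    fbit (l.set u true) u = true := by
  unfold fbit
  rw [List.getD_eq_getElem _ _ (by simpa using h)]
  simp [h]

theorem fbit_set_ne (l : List Bool) (u w : Nat) (h : w ≠ u) :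
    fbit (l.set u true) w = fbit l w := by
  unfold fbit List.getD
  rw [List.getElem?_set_ne (fun he => h he.symm)]

theorem fget_set_self (l : List Int) (u : Nat) (x : Int) (h : u < l.length) :
    fget (l.set u x) u = x := by
  unfold fget
  rw [List.getD_eq_getElem _ _ (by simpa using h)]
  simp [h]

theorem fget_set_ne (l : List Int) (u w : Nat) (x : Int) (h : w ≠ u) :
    fget (l.set u x) w = fget l w := by
  unfold fget List.getD
  rw [List.getElem?_set_ne (fun he => h he.symm)]

theorem fbit_replicate (k i : Nat) : fbit (List.replicate k false) i = false := by
  unfold fbit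
  by_cases h : i < k
  · rw [List.getD_eq_getElem _ _ (by simpa using h)]
    simp
  · rw [List.getD_eq_default _ _ (by simpa using h)]

theorem fbit_init (k s i : Nat) (hs : s < k) :
    fbit ((List.replicate k false).set s true) i = decide (i = s) := by
  by_cases h : i = s
  · subst h
    rw [fbit_set_self _ _ (by simpa using hs)]
    simp
  · rw [fbit_set_ne _ _ _ h, fbit_replicate]
    simp [h]

theorem count_false_set_lt (l : List Bool) (u : Nat) (hu : u < l.length)
    (h : fbit l u = false) : (l.set u true).count false < l.count false := by
  have hgl : l[u] = false := by
    unfold fbit at h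
    rwa [List.getD_eq_getElem _ _ hu] at h
  have := count_set_true l u hu hgl
  omega

-- ---------- flat index / cell bridge ----------

def toCell (m u : Nat) : Nat × Nat := (u / m, u % m)

def toIdx (m : Nat) (c : Nat × Nat) : Nat := c.1 * m + c.2

theorem toIdx_toCell (m u : Nat) : toIdx m (toCell m u) = u := by
  show u / m * m + u % m = u
  rw [Nat.mul_comm]
  exact Nat.div_add_mod u m

theorem toCell_toIdx (m : Nat) (c : Nat × Nat) (h : c.2 < m) : toCell m (toIdx m c) = c := by
  have hm : 0 < m := lt_of_le_of_lt (Nat.zero_le _) h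
  obtain ⟨a, b⟩ := c
  simp only at h
  have h1 : (a * m + b) / m = a := by
    rw [Nat.add_comm, Nat.mul_comm, Nat.add_mul_div_left _ _ hm, Nat.div_eq_of_lt h]
    omega
  have h2 : (a * m + b) % m = b := by
    rw [Nat.add_comm, Nat.mul_comm, Nat.add_mul_mod_self_left, Nat.mod_eq_of_lt h]
  show ((a * m + b) / m, (a * m + b) % m) = (a, b)
  rw [h1, h2]

theorem toIdx_lt (n m : Nat) (c : Nat × Nat) (h1 : c.1 < n) (h2 : c.2 < m) :
    toIdx m c < n * m := by
  unfold toIdx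
  calc c.1 * m + c.2 < c.1 * m + m := by omega
    _ = (c.1 + 1) * m := by ring
    _ ≤ n * m := Nat.mul_le_mul_right m h1

theorem toCell_fst_lt (n m u : Nat) (h : u < n * m) : (toCell m u).1 < n := by
  have hm : 0 < m := by
    rcases Nat.eq_zero_or_pos m with h0 | h0
    · rw [h0, Nat.mul_zero] at h; omega
    · exact h0
  show u / m < n
  exact (Nat.div_lt_iff_lt_mul hm).2 h

theorem toCell_snd_lt (m u : Nat) (hm : 0 < m) : (toCell m u).2 < m := Nat.mod_lt _ hm

theorem toCell_ge (n m u : Nat) (hm : 0 < m) (h : n * m ≤ u) : n ≤ (toCell m u).1 := by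
  show n ≤ u / m
  exact (Nat.le_div_iff_mul_le hm).2 h

-- ---------- flatten ----------

theorem flatten_length (mat : List (List Int)) (M : Nat)
    (hM : ∀ r ∈ mat, r.length = M) : mat.flatten.length = mat.length * M := by
  induction mat with
  | nil => simp
  | cons r t ih =>
    simp only [List.flatten_cons, List.length_append, List.length_cons]
    rw [hM r List.mem_cons_self, ih (fun x hx => hM x (List.mem_cons_of_mem _ hx))]
    ring

theorem fget_flatten (M : Nat) (hMpos : 0 < M) :
    ∀ (mat : List (List Int)), (∀ r ∈ mat, r.length = M) →
    ∀ u, fget mat.flatten u = matVal mat (toCell M u) := by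
  intro mat
  induction mat with
  | nil =>
    intro _ u
    unfold fget matVal toCell List.getD
    simp
  | cons r t ih =>
    intro hM u
    have hr : r.length = M := hM r List.mem_cons_self
    have ht : ∀ x ∈ t, x.length = M := fun x hx => hM x (List.mem_cons_of_mem _ hx)
    by_cases hu : u < M
    · have hdiv : u / M = 0 := Nat.div_eq_of_lt hu
      have hmod : u % M = u := Nat.mod_eq_of_lt hu
      unfold fget matVal toCell
      simp only [hdiv, hmod, List.flatten_cons, List.getD_cons_zero]
      unfold List.getD
      rw [List.getElem?_append_left (by rw [hr]; exact hu)]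
    · have hge : M ≤ u := Nat.le_of_not_lt hu
      have hdiv : u / M = (u - M) / M + 1 := Nat.div_eq_sub_div hMpos hge
      have hmod : u % M = (u - M) % M := Nat.mod_eq_sub_mod hge
      have hih := ih ht (u - M)
      unfold fget matVal toCell at hih ⊢
      simp only [hdiv, hmod, List.flatten_cons, List.getD_cons_succ]
      unfold List.getD at hih ⊢
      rw [List.getElem?_append_right (by rw [hr]; exact hge), hr]
      exact hih

theorem cells_eq (mat : List (List Int)) (M : Nat) (hM : ∀ r ∈ mat, r.length = M) :
    cells mat = (List.range (mat.length * M)).map (toCell M) := by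
  have hrl : ∀ i, i < mat.length → (mat.getD i []).length = M := fun i hi => by
    rw [List.getD_eq_getElem _ _ hi]; exact hM _ (List.getElem_mem hi)
  unfold cells
  have hcg : (List.range mat.length).flatMap
        (fun i => (List.range (mat.getD i []).length).map (fun j => (i, j)))
      = (List.range mat.length).flatMap (fun i => (List.range M).map (fun j => (i, j))) := by
    apply List.flatMap_congr
    intro i hi
    rw [hrl i (List.mem_range.1 hi)]
  rw [hcg]
  generalize mat.length = n
  induction n with
  | zero => simp
  | succ n ih =>
    rw [List.range_succ, List.flatMap_append, Nat.succ_mul, List.range_add, List.map_append, ih]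
    congr 1
    simp only [List.flatMap_cons, List.flatMap_nil, List.append_nil, List.map_map]
    apply List.map_congr_left
    intro j hj
    have hj' : j < M := List.mem_range.1 hj
    have key : toCell M (n * M + j) = (n, j) := toCell_toIdx M (n, j) hj'
    simp [Function.comp, key]

theorem nCols_of_rows (cur : List (List Int)) (M : Nat)
    (hM : ∀ r ∈ cur, r.length = M) (hne : cur ≠ []) : nCols cur = M := by
  cases cur with
  | nil => exact absurd rfl hne
  | cons r t => exact hM r List.mem_cons_self

theorem intlist_ext (l l' : List Int) (hlen : l.length = l'.length)
    (h : ∀ u, fget l u = fget l' u) : l = l' := by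
  apply List.ext_getElem hlen
  intro i hi hi'
  have := h i
  unfold fget at this
  rwa [List.getD_eq_getElem _ _ hi, List.getD_eq_getElem _ _ hi'] at this

theorem chunk_row (M : Nat) :
    ∀ (rows : List (List Int)), (∀ r ∈ rows, r.length = M) →
    ∀ i, i < rows.length → (rows.flatten.drop (i * M)).take M = rows.getD i [] := by
  intro rows
  induction rows with
  | nil => intro _ i hi; simp at hi
  | cons r t ih =>
    intro hM i hi
    have hr : r.length = M := hM r List.mem_cons_self
    cases i with
    | zero =>
      simp only [Nat.zero_mul, List.drop_zero, List.flatten_cons, List.getD_cons_zero]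
      rw [← hr]
      exact List.take_left
    | succ i =>
      simp only [List.flatten_cons, List.getD_cons_succ]
      have hstep : (i + 1) * M = r.length + i * M := by rw [hr]; ring
      rw [hstep, List.drop_append]
      rw [List.drop_eq_nil_of_le (by omega : r.length ≤ r.length + i * M)]
      simp only [List.nil_append]
      rw [show r.length + i * M - r.length = i * M by omega]
      exact ih (fun x hx => hM x (List.mem_cons_of_mem _ hx)) i (by simpa using hi)

theorem unflatten_eq (rows : List (List Int)) (M : Nat)
    (hM : ∀ r ∈ rows, r.length = M) :
    (List.range rows.length).map (fun i => (rows.flatten.drop (i * M)).take M) = rows := by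
  apply List.ext_getElem (by simp)
  intro i hi hi'
  simp only [List.getElem_map, List.getElem_range]
  rw [chunk_row M rows hM i hi']
  exact List.getD_eq_getElem rows [] hi'

-- ---------- the flat write loop ----------

theorem fwrite_spec (comp : List Bool) (nv : Int) :
    ∀ (L : List Nat) (st : List Int × List Bool),
      (∀ w, fbit comp w = true → w < st.1.length ∧ w < st.2.length) →
      (L.foldl (fun (st2 : List Int × List Bool) u =>
          if fbit comp u then (st2.1.set u nv, st2.2.set u true) else st2) st).1.length = st.1.length ∧
      (L.foldl (fun (st2 : List Int × List Bool) u =>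
          if fbit comp u then (st2.1.set u nv, st2.2.set u true) else st2) st).2.length = st.2.length ∧
      (∀ w, fget (L.foldl (fun (st2 : List Int × List Bool) u =>
          if fbit comp u then (st2.1.set u nv, st2.2.set u true) else st2) st).1 w =
        if w ∈ L ∧ fbit comp w = true then nv else fget st.1 w) ∧
      (∀ w, fbit (L.foldl (fun (st2 : List Int × List Bool) u =>
          if fbit comp u then (st2.1.set u nv, st2.2.set u true) else st2) st).2 w =
        (fbit st.2 w || (decide (w ∈ L) && fbit comp w))) := by
  intro L
  induction L with
  | nil =>
    intro st _
    refine ⟨rfl, rfl, ?_, ?_⟩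
    · intro w; simp
    · intro w; simp
  | cons x L ih =>
    intro st hb
    simp only [List.foldl_cons]
    by_cases hcx : fbit comp x = true
    · have hbx := hb x hcx
      rw [if_pos hcx]
      obtain ⟨j1, j2, j3, j4⟩ := ih (st.1.set x nv, st.2.set x true)
        (by intro w hw; have := hb w hw; simpa using this)
      refine ⟨by simpa using j1, by simpa using j2, ?_, ?_⟩
      · intro w
        rw [j3 w]
        by_cases hwL : w ∈ L ∧ fbit comp w = true
        · rw [if_pos hwL, if_pos ⟨List.mem_cons_of_mem _ hwL.1, hwL.2⟩]
        · rw [if_neg hwL]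
          by_cases hwx : w = x
          · subst hwx
            rw [if_pos ⟨List.mem_cons_self, hcx⟩]
            exact fget_set_self _ _ _ hbx.1
          · have hno : ¬(w ∈ x :: L ∧ fbit comp w = true) := by
              rintro ⟨hm, hc⟩
              rcases List.mem_cons.1 hm with rfl | hm
              · exact hwx rfl
              · exact hwL ⟨hm, hc⟩
            rw [if_neg hno]
            exact fget_set_ne _ _ _ _ hwx
      · intro w
        rw [j4 w]
        by_cases hwx : w = x
        · subst hwx
          rw [fbit_set_self _ _ hbx.2]
          simp [hcx]
        · rw [fbit_set_ne _ _ _ hwx]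
          by_cases hcw : fbit comp w = true
          · simp [hcw, List.mem_cons, hwx]
          · have hf : fbit comp w = false := by simpa using hcw
            simp [hf]
    · have hcx' : fbit comp x = false := by simpa using hcx
      rw [if_neg (by simp [hcx'])]
      obtain ⟨j1, j2, j3, j4⟩ := ih st hb
      refine ⟨j1, j2, ?_, ?_⟩
      · intro w
        rw [j3 w]
        by_cases hwL : w ∈ L ∧ fbit comp w = true
        · rw [if_pos hwL, if_pos ⟨List.mem_cons_of_mem _ hwL.1, hwL.2⟩]
        · rw [if_neg hwL]
          have hno : ¬(w ∈ x :: L ∧ fbit comp w = true) := by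
            rintro ⟨hm, hc⟩
            rcases List.mem_cons.1 hm with rfl | hm
            · rw [hcx'] at hc; exact Bool.noConfusion hc
            · exact hwL ⟨hm, hc⟩
          rw [if_neg hno]
      · intro w
        rw [j4 w]
        by_cases hwx : w = x
        · subst hwx; simp [hcx']
        · by_cases hcw : fbit comp w = true
          · simp [hcw, List.mem_cons, hwx]
          · have hf : fbit comp w = false := by simpa using hcw
            simp [hf]

-- ---------- B-side invariant: the fixpoint sweeps ----------

def FInv (cur : List (List Int)) (M : Nat) (v : Int) (s : Nat) (st : FState) : Prop :=
  st.comp.length = cur.length * M ∧ st.rowact.length = cur.length ∧ st.colact.length = M ∧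
  fbit st.comp s = true ∧
  (∀ u, fbit st.comp u = true → matVal cur (toCell M u) = v) ∧
  (∀ i, fbit st.rowact i = true ↔ ∃ u, fbit st.comp u = true ∧ u / M = i) ∧
  (∀ j, fbit st.colact j = true ↔ ∃ u, fbit st.comp u = true ∧ u % M = j) ∧
  (∀ T : Nat × Nat → Prop, T (toCell M s) → ClosedM cur v T →
    ∀ u, fbit st.comp u = true → T (toCell M u))

theorem ffold_inv (cur : List (List Int)) (M : Nat) (v : Int) (s : Nat)
    (hM : ∀ r ∈ cur, r.length = M) :
    ∀ (L : List Nat), (∀ u ∈ L, u < cur.length * M) →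
    ∀ st : FState, FInv cur M v s st →
      FInv cur M v s (L.foldl (fstep cur.flatten v M) st) ∧
      (L.foldl (fstep cur.flatten v M) st).comp.count false ≤ st.comp.count false ∧
      (st.changed = true → (L.foldl (fstep cur.flatten v M) st).changed = true) ∧
      ((L.foldl (fstep cur.flatten v M) st).changed = true → st.changed = false →
        (L.foldl (fstep cur.flatten v M) st).comp.count false < st.comp.count false) ∧
      ((L.foldl (fstep cur.flatten v M) st).changed = false →
        L.foldl (fstep cur.flatten v M) st = st ∧
        ∀ u ∈ L, ¬(fget cur.flatten u = v ∧ fbit st.comp u = false ∧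
          (fbit st.rowact (u / M) = true ∨ fbit st.colact (u % M) = true))) := by
  intro L
  induction L with
  | nil =>
    intro _ st inv
    refine ⟨inv, le_refl _, fun h => h, ?_, ?_⟩
    · intro h1 h2
      rw [List.foldl_nil] at h1
      rw [h1] at h2
      exact Bool.noConfusion h2
    · intro _
      exact ⟨rfl, by simp⟩
  | cons u L ih =>
    intro hL st inv
    simp only [List.foldl_cons]
    have hu : u < cur.length * M := hL u List.mem_cons_self
    have hLt : ∀ x ∈ L, x < cur.length * M := fun x hx => hL x (List.mem_cons_of_mem _ hx)
    have hMpos : 0 < M := Nat.pos_of_ne_zero (fun h0 => by rw [h0, Nat.mul_zero] at hu; omega)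
    have hne : cur ≠ [] := by
      intro h0
      rw [h0] at hu
      simp at hu
    have hnC : nCols cur = M := nCols_of_rows cur M hM hne
    obtain ⟨hlc, hlr, hlcl, hstart, hval, hrowc, hcolc, hmin⟩ := inv
    by_cases hg : fget cur.flatten u = v ∧ fbit st.comp u = false ∧
        (fbit st.rowact (u / M) = true ∨ fbit st.colact (u % M) = true)
    · have hstep : fstep cur.flatten v M st u =
          { comp := st.comp.set u true, rowact := st.rowact.set (u / M) true,
            colact := st.colact.set (u % M) true, changed := true } := by
        unfold fstep
        rw [if_pos hg]
      obtain ⟨hgv, hgc, hgact⟩ := hg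
      have hucomp : u < st.comp.length := by rw [hlc]; exact hu
      have hurow : u / M < st.rowact.length := by
        rw [hlr]; exact (Nat.div_lt_iff_lt_mul hMpos).2 hu
      have hucol : u % M < st.colact.length := by rw [hlcl]; exact Nat.mod_lt _ hMpos
      have hcomp' : ∀ w, fbit (st.comp.set u true) w = true ↔ (fbit st.comp w = true ∨ w = u) := by
        intro w
        by_cases hwu : w = u
        · subst hwu
          rw [fbit_set_self _ _ hucomp]
          simp
        · rw [fbit_set_ne _ _ _ hwu]
          simp [hwu]
      have hvalu : matVal cur (toCell M u) = v := by
        rw [← fget_flatten M hMpos cur hM u]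
        exact hgv
      have hinRu : inRM cur (toCell M u) := by
        refine ⟨toCell_fst_lt cur.length M u hu, ?_⟩
        rw [hnC]
        exact toCell_snd_lt M u hMpos
      have inv' : FInv cur M v s
          { comp := st.comp.set u true, rowact := st.rowact.set (u / M) true,
            colact := st.colact.set (u % M) true, changed := true } := by
        refine ⟨by simp [hlc], by simp [hlr], by simp [hlcl], ?_, ?_, ?_, ?_, ?_⟩
        · exact (hcomp' s).2 (Or.inl hstart)
        · intro w hw
          rcases (hcomp' w).1 hw with hw | rfl
          · exact hval w hw
          · exact hvalu
        · intro i
          constructor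
          · intro hi
            by_cases hiu : i = u / M
            · exact ⟨u, (hcomp' u).2 (Or.inr rfl), hiu.symm⟩
            · rw [fbit_set_ne _ _ _ hiu] at hi
              obtain ⟨w, hw, hwi⟩ := (hrowc i).1 hi
              exact ⟨w, (hcomp' w).2 (Or.inl hw), hwi⟩
          · rintro ⟨w, hw, rfl⟩
            rcases (hcomp' w).1 hw with hw | rfl
            · by_cases hiu : w / M = u / M
              · rw [hiu]
                exact fbit_set_self _ _ hurow
              · rw [fbit_set_ne _ _ _ hiu]
                exact (hrowc _).2 ⟨w, hw, rfl⟩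
            · exact fbit_set_self _ _ hurow
        · intro j
          constructor
          · intro hj
            by_cases hju : j = u % M
            · exact ⟨u, (hcomp' u).2 (Or.inr rfl), hju.symm⟩
            · rw [fbit_set_ne _ _ _ hju] at hj
              obtain ⟨w, hw, hwj⟩ := (hcolc j).1 hj
              exact ⟨w, (hcomp' w).2 (Or.inl hw), hwj⟩
          · rintro ⟨w, hw, rfl⟩
            rcases (hcomp' w).1 hw with hw | rfl
            · by_cases hju : w % M = u % M
              · rw [hju]
                exact fbit_set_self _ _ hucol
              · rw [fbit_set_ne _ _ _ hju]
                exact (hcolc _).2 ⟨w, hw, rfl⟩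
            · exact fbit_set_self _ _ hucol
        · intro T hT hcl w hw
          rcases (hcomp' w).1 hw with hw | rfl
          · exact hmin T hT hcl w hw
          · rcases hgact with hr | hc
            · obtain ⟨w0, hw0, hw0e⟩ := (hrowc _).1 hr
              exact hcl (toCell M w0) (hmin T hT hcl w0 hw0) _ hinRu hvalu (Or.inl hw0e)
            · obtain ⟨w0, hw0, hw0e⟩ := (hcolc _).1 hc
              exact hcl (toCell M w0) (hmin T hT hcl w0 hw0) _ hinRu hvalu (Or.inr hw0e)
      have hcnt : (st.comp.set u true).count false < st.comp.count false :=
        count_false_set_lt st.comp u hucomp hgc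
      rw [hstep]
      obtain ⟨j1, j2, j3, _, j5⟩ := ih hLt _ inv'
      refine ⟨j1, ?_, ?_, ?_, ?_⟩
      · calc (L.foldl (fstep cur.flatten v M) _).comp.count false
            ≤ (st.comp.set u true).count false := j2
          _ ≤ st.comp.count false := le_of_lt hcnt
      · intro _
        exact j3 rfl
      · intro _ _
        calc (L.foldl (fstep cur.flatten v M) _).comp.count false
            ≤ (st.comp.set u true).count false := j2
          _ < st.comp.count false := hcnt
      · intro hf
        have := j3 rfl
        rw [hf] at this
        exact Bool.noConfusion this
    · have hstep : fstep cur.flatten v M st u = st := by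
        unfold fstep
        rw [if_neg hg]
      rw [hstep]
      obtain ⟨j1, j2, j3, j4, j5⟩ := ih hLt st ⟨hlc, hlr, hlcl, hstart, hval, hrowc, hcolc, hmin⟩
      refine ⟨j1, j2, j3, j4, ?_⟩
      intro hf
      obtain ⟨he, hall⟩ := j5 hf
      refine ⟨he, ?_⟩
      intro x hx
      rcases List.mem_cons.1 hx with rfl | hx
      · exact hg
      · exact hall x hx

theorem fLoop_spec (cur : List (List Int)) (M : Nat) (v : Int) (s : Nat)
    (hM : ∀ r ∈ cur, r.length = M) :
    ∀ (k : Nat) (st : FState), FInv cur M v s st → st.comp.count false < k →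
      FInv cur M v s (fLoop cur.flatten v (cur.length * M) M k st) ∧
      ∀ u, u < cur.length * M →
        ¬(fget cur.flatten u = v ∧
          fbit (fLoop cur.flatten v (cur.length * M) M k st).comp u = false ∧
          (fbit (fLoop cur.flatten v (cur.length * M) M k st).rowact (u / M) = true ∨
           fbit (fLoop cur.flatten v (cur.length * M) M k st).colact (u % M) = true)) := by
  intro k
  induction k with
  | zero => intro st _ h; omega
  | succ k ih =>
    intro st inv hcnt
    have invf : FInv cur M v s { st with changed := false } := inv
    have hsw := ffold_inv cur M v s hM (List.range (cur.length * M))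
      (fun u hu => List.mem_range.1 hu) { st with changed := false } invf
    have hswe : fSweep cur.flatten v (cur.length * M) M { st with changed := false } =
        (List.range (cur.length * M)).foldl (fstep cur.flatten v M)
          { st with changed := false } := rfl
    rw [← hswe] at hsw
    obtain ⟨j1, j2, j3, j4, j5⟩ := hsw
    by_cases hch : (fSweep cur.flatten v (cur.length * M) M { st with changed := false }).changed = true
    · have hlt : (fSweep cur.flatten v (cur.length * M) M { st with changed := false }).comp.count false
          < st.comp.count false := j4 hch rfl
      rw [show fLoop cur.flatten v (cur.length * M) M (k + 1) st =
          fLoop cur.flatten v (cur.length * M) M k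
            (fSweep cur.flatten v (cur.length * M) M { st with changed := false }) from by
        simp only [fLoop]
        rw [if_pos hch]]
      exact ih _ j1 (by omega)
    · have hch' : (fSweep cur.flatten v (cur.length * M) M { st with changed := false }).changed = false := by
        simpa using hch
      obtain ⟨he, hall⟩ := j5 hch'
      rw [show fLoop cur.flatten v (cur.length * M) M (k + 1) st =
          fSweep cur.flatten v (cur.length * M) M { st with changed := false } from by
        simp only [fLoop]
        rw [if_neg (by simp [hch'])]]
      rw [he]
      refine ⟨invf, ?_⟩
      intro u hu
      exact hall u (List.mem_range.2 hu)

-- ---------- the previous-rank pass ----------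

theorem fPrev_eq (cur : List (List Int)) (M : Nat) (hMpos : 0 < M)
    (hM : ∀ r ∈ cur, r.length = M)
    (v : Int) (comp rowact colact : List Bool)
    (hlc : comp.length = cur.length * M)
    (hrowc : ∀ i, fbit rowact i = true ↔ ∃ w, fbit comp w = true ∧ w / M = i)
    (hcolc : ∀ j, fbit colact j = true ↔ ∃ w, fbit comp w = true ∧ w % M = j) :
    fPrev cur.flatten v (cur.length * M) M rowact colact =
      groupPrev cur v
        (((List.range (cur.length * M)).filter (fun w => fbit comp w)).map (toCell M)) := by
  have hrl : ∀ i, i < cur.length → (cur.getD i []).length = M := fun i hi => by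
    rw [List.getD_eq_getElem _ _ hi]; exact hM _ (List.getElem_mem hi)
  have hmemLc : ∀ x, x ∈ ((List.range (cur.length * M)).filter (fun w => fbit comp w)).map (toCell M) ↔
      ∃ w, fbit comp w = true ∧ toCell M w = x := by
    intro x
    simp only [List.mem_map, List.mem_filter, List.mem_range]
    constructor
    · rintro ⟨w, ⟨_, hw2⟩, rfl⟩
      exact ⟨w, hw2, rfl⟩
    · rintro ⟨w, hw, rfl⟩
      refine ⟨w, ⟨?_, hw⟩, rfl⟩
      have := fbit_lt comp w hw
      rwa [hlc] at this
  have hfun : (fun (acc : Option Int) (u : Nat) =>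
      if fget cur.flatten u < v ∧ (fbit rowact (u / M) ∨ fbit colact (u % M)) then
        match acc with
        | none => some (fget cur.flatten u)
        | some p => if fget cur.flatten u > p then some (fget cur.flatten u) else some p
      else acc)
      = (fun (acc : Option Int) (u : Nat) =>
      if fget cur.flatten u < v ∧ (fbit rowact (u / M) ∨ fbit colact (u % M)) then
        omax acc (fget cur.flatten u) else acc) := by
    funext acc u
    by_cases hgu : fget cur.flatten u < v ∧ (fbit rowact (u / M) ∨ fbit colact (u % M))
    · rw [if_pos hgu, if_pos hgu]
      cases acc with
      | none => rfl
      | some p =>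
        show (if fget cur.flatten u > p then some (fget cur.flatten u) else some p) =
          omax (some p) (fget cur.flatten u)
        by_cases h2 : fget cur.flatten u > p
        · rw [if_pos h2]
          simp [omax, max_eq_right (le_of_lt h2)]
        · rw [if_neg h2]
          simp [omax, max_eq_left (by omega : fget cur.flatten u ≤ p)]
    · rw [if_neg hgu, if_neg hgu]
  have h1 : fPrev cur.flatten v (cur.length * M) M rowact colact =
      (((List.range (cur.length * M)).filter
          (fun u => decide (fget cur.flatten u < v ∧
            (fbit rowact (u / M) ∨ fbit colact (u % M))))).map
        (fun u => fget cur.flatten u)).foldl omax none := by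
    unfold fPrev
    rw [hfun]
    exact foldl_guard_omax (fun u => fget cur.flatten u)
      (fun u => fget cur.flatten u < v ∧ (fbit rowact (u / M) ∨ fbit colact (u % M)))
      (List.range (cur.length * M)) none
  rw [h1]
  show listMax _ = _
  unfold groupPrev prevSpec
  apply listMax_congr
  intro x
  simp only [List.mem_map, List.mem_filter, List.mem_range, decide_eq_true_eq, touchesB_iff,
    touches]
  constructor
  · rintro ⟨u, ⟨hu, hlt, hact⟩, rfl⟩
    have hc1 : (toCell M u).1 < cur.length := toCell_fst_lt cur.length M u hu
    have hc2 : (toCell M u).2 < M := toCell_snd_lt M u hMpos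
    have hcell : toCell M u ∈ cells cur := by
      rw [mem_cells]
      exact ⟨hc1, by rw [hrl _ hc1]; exact hc2⟩
    have hval : fget cur.flatten u = matVal cur (toCell M u) := fget_flatten M hMpos cur hM u
    refine ⟨toCell M u, ⟨⟨hcell, ?_⟩, by rw [← hval]; exact hlt⟩, hval.symm⟩
    rcases hact with hr | hc
    · obtain ⟨w0, hw0, hw0e⟩ := (hrowc _).1 hr
      have hw0lt : w0 < cur.length * M := by
        have := fbit_lt _ _ hw0
        rwa [hlc] at this
      exact ⟨toCell M w0, ⟨w0, ⟨hw0lt, hw0⟩, rfl⟩, Or.inl hw0e⟩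
    · obtain ⟨w0, hw0, hw0e⟩ := (hcolc _).1 hc
      have hw0lt : w0 < cur.length * M := by
        have := fbit_lt _ _ hw0
        rwa [hlc] at this
      exact ⟨toCell M w0, ⟨w0, ⟨hw0lt, hw0⟩, rfl⟩, Or.inr hw0e⟩
  · rintro ⟨c, ⟨⟨hcell, t, ht, hline⟩, hlt⟩, rfl⟩
    rw [mem_cells] at hcell
    have hc1 : c.1 < cur.length := hcell.1
    have hc2 : c.2 < M := by
      have := hcell.2
      rwa [hrl _ hc1] at this
    have hu : toIdx M c < cur.length * M := toIdx_lt cur.length M c hc1 hc2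
    have hcc : toCell M (toIdx M c) = c := toCell_toIdx M c hc2
    have hval : fget cur.flatten (toIdx M c) = matVal cur c := by
      rw [fget_flatten M hMpos cur hM, hcc]
    obtain ⟨w0, ⟨_, hw0⟩, hw0e⟩ := ht
    refine ⟨toIdx M c, ⟨hu, by rw [hval]; exact hlt, ?_⟩, hval⟩
    have hdivc : toIdx M c / M = c.1 := congrArg Prod.fst hcc
    have hmodc : toIdx M c % M = c.2 := congrArg Prod.snd hcc
    rcases hline with h1 | h2
    · left
      rw [hdivc]
      apply (hrowc c.1).2
      refine ⟨w0, hw0, ?_⟩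
      rw [show w0 / M = (toCell M w0).1 from rfl, hw0e]
      exact h1
    · right
      rw [hmodc]
      apply (hcolc c.2).2
      refine ⟨w0, hw0, ?_⟩
      rw [show w0 % M = (toCell M w0).2 from rfl, hw0e]
      exact h2

-- ---------- the outer loop ----------

def stepA (st : List (List Int) × PySem.Set (Nat × Nat)) (cv : Nat × Nat) :
    List (List Int) × PySem.Set (Nat × Nat) :=
  if st.2.contains cv then st else
  let tp := find_twins_with_prev cv st.1
  tp.1.foldl
    (fun st2 twin =>
      (msetv st2.1 twin (match tp.2 with | some p => p + 1 | none => 1),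
       st2.2.add twin)) st

def clTerm (flat : List Int) (n M u : Nat) (v : Int) : FState :=
  fLoop flat v (n * M) M
    (((List.replicate (n * M) false).set u true).count false + 1)
    { comp := (List.replicate (n * M) false).set u true,
      rowact := (List.replicate n false).set (u / M) true,
      colact := (List.replicate M false).set (u % M) true,
      changed := true }

def nvTerm (flat : List Int) (n M u : Nat) : Int :=
  match fPrev flat (fget flat u) (n * M) M (clTerm flat n M u (fget flat u)).rowact
      (clTerm flat n M u (fget flat u)).colact with
  | none => 1 | some p => p + 1

theorem stepA_eq (p1 : List (List Int)) (p2 : PySem.Set (Nat × Nat)) (c0 : Nat × Nat)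
    (hd : ¬(p2.contains c0 = true)) :
    stepA (p1, p2) c0 =
      (find_twins_with_prev c0 p1).1.foldl
        (fun st2 twin =>
          (msetv st2.1 twin
            (match (find_twins_with_prev c0 p1).2 with | some p => p + 1 | none => 1),
           st2.2.add twin)) (p1, p2) := by
  unfold stepA
  rw [if_neg hd]

theorem stepF_eq (n M : Nat) (flat : List Int) (d : List Bool) (u : Nat)
    (hd : ¬(fbit d u = true)) :
    stepF n M (flat, d) u =
      (List.range (n * M)).foldl
        (fun (st2 : List Int × List Bool) w =>
          if fbit (clTerm flat n M u (fget flat u)).comp w then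
            (st2.1.set w (nvTerm flat n M u), st2.2.set w true)
          else st2) (flat, d) := by
  unfold stepF clTerm nvTerm
  rw [if_neg hd]
  rfl

theorem cl_spec (mat0 p1 : List (List Int))
    (hrect : ∀ r ∈ mat0, r.length = (mat0.headD []).length)
    (hdm : MDims mat0 p1) (u : Nat) (hu : u < mat0.length * nCols mat0) :
    FInv p1 (nCols mat0) (fget p1.flatten u) u
      (clTerm p1.flatten mat0.length (nCols mat0) u (fget p1.flatten u)) ∧
    ∀ w, w < mat0.length * nCols mat0 →
      ¬(fget p1.flatten w = fget p1.flatten u ∧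
        fbit (clTerm p1.flatten mat0.length (nCols mat0) u (fget p1.flatten u)).comp w = false ∧
        (fbit (clTerm p1.flatten mat0.length (nCols mat0) u (fget p1.flatten u)).rowact
            (w / nCols mat0) = true ∨
         fbit (clTerm p1.flatten mat0.length (nCols mat0) u (fget p1.flatten u)).colact
            (w % nCols mat0) = true)) := by
  have hMpos : 0 < nCols mat0 :=
    Nat.pos_of_ne_zero (fun h0 => by rw [h0, Nat.mul_zero] at hu; omega)
  have hrows : ∀ r ∈ p1, r.length = nCols mat0 := MDims_rows mat0 p1 hrect hdm
  have hlen1 : p1.length = mat0.length := hdm.1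
  have hnm : p1.length * nCols mat0 = mat0.length * nCols mat0 := by rw [hlen1]
  have hudiv : u / nCols mat0 < mat0.length := toCell_fst_lt mat0.length (nCols mat0) u hu
  have hvmat : fget p1.flatten u = matVal p1 (toCell (nCols mat0) u) :=
    fget_flatten (nCols mat0) hMpos p1 hrows u
  have hcomp0 : ∀ w, fbit ((List.replicate (mat0.length * nCols mat0) false).set u true) w = true
      ↔ w = u := by
    intro w
    rw [fbit_init _ _ _ hu]
    simp
  have hrow0 : ∀ i, fbit ((List.replicate mat0.length false).set (u / nCols mat0) true) i = true
      ↔ i = u / nCols mat0 := by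
    intro i
    rw [fbit_init _ _ _ hudiv]
    simp
  have hcol0 : ∀ j, fbit ((List.replicate (nCols mat0) false).set (u % nCols mat0) true) j = true
      ↔ j = u % nCols mat0 := by
    intro j
    rw [fbit_init _ _ _ (Nat.mod_lt _ hMpos)]
    simp
  have hst0inv : FInv p1 (nCols mat0) (fget p1.flatten u) u
      { comp := (List.replicate (mat0.length * nCols mat0) false).set u true,
        rowact := (List.replicate mat0.length false).set (u / nCols mat0) true,
        colact := (List.replicate (nCols mat0) false).set (u % nCols mat0) true,
        changed := true } := by
    refine ⟨by simp [hlen1], by simp [hlen1], by simp, (hcomp0 u).2 rfl, ?_, ?_, ?_, ?_⟩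
    · intro w hw
      obtain rfl := (hcomp0 w).1 hw
      exact hvmat.symm
    · intro i
      constructor
      · intro hi
        exact ⟨u, (hcomp0 u).2 rfl, ((hrow0 i).1 hi).symm⟩
      · rintro ⟨w, hw, rfl⟩
        obtain rfl := (hcomp0 w).1 hw
        exact (hrow0 _).2 rfl
    · intro j
      constructor
      · intro hj
        exact ⟨u, (hcomp0 u).2 rfl, ((hcol0 j).1 hj).symm⟩
      · rintro ⟨w, hw, rfl⟩
        obtain rfl := (hcomp0 w).1 hw
        exact (hcol0 _).2 rfl
    · intro T hT _ w hw
      obtain rfl := (hcomp0 w).1 hw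
      exact hT
  have hloop := fLoop_spec p1 (nCols mat0) (fget p1.flatten u) u hrows
    (((List.replicate (mat0.length * nCols mat0) false).set u true).count false + 1)
    _ hst0inv (Nat.lt_succ_self _)
  rw [hnm] at hloop
  unfold clTerm
  exact hloop

def OInvF (mat0 : List (List Int)) (p : List (List Int) × PySem.Set (Nat × Nat))
    (q : List Int × List Bool) : Prop :=
  q.1 = p.1.flatten ∧ MDims mat0 p.1 ∧ q.2.length = mat0.length * nCols mat0 ∧
  (∀ c, inRM mat0 c → (c ∈ p.2 ↔ fbit q.2 (toIdx (nCols mat0) c) = true))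

theorem stepAB (mat0 : List (List Int))
    (hrect : ∀ r ∈ mat0, r.length = (mat0.headD []).length)
    (u : Nat) (hu : u < mat0.length * nCols mat0)
    (p : List (List Int) × PySem.Set (Nat × Nat)) (q : List Int × List Bool)
    (h : OInvF mat0 p q) :
    OInvF mat0 (stepA p (toCell (nCols mat0) u)) (stepF mat0.length (nCols mat0) q u) := by
  obtain ⟨p1, p2⟩ := p
  obtain ⟨q1, q2⟩ := q
  obtain ⟨he, hdm, hlen2, hdone⟩ := h
  simp only at he hdm hlen2 hdone
  subst he
  have hMpos : 0 < nCols mat0 :=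
    Nat.pos_of_ne_zero (fun h0 => by rw [h0, Nat.mul_zero] at hu; omega)
  have hrm : ∀ r ∈ p1, r.length = (p1.headD []).length := MDims_rect hdm hrect
  have hrows : ∀ r ∈ p1, r.length = nCols mat0 := MDims_rows mat0 p1 hrect hdm
  have hlen1 : p1.length = mat0.length := hdm.1
  have hnm : p1.length * nCols mat0 = mat0.length * nCols mat0 := by rw [hlen1]
  have hnCp1 : nCols p1 = nCols mat0 := MDims_nCols hdm
  have hflen : p1.flatten.length = mat0.length * nCols mat0 := by
    rw [flatten_length p1 (nCols mat0) hrows, hlen1]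
  have hc0 : inRM mat0 (toCell (nCols mat0) u) :=
    ⟨toCell_fst_lt mat0.length (nCols mat0) u hu, toCell_snd_lt (nCols mat0) u hMpos⟩
  have hc0' : inRM p1 (toCell (nCols mat0) u) := (MDims_inR hdm _).2 hc0
  have hidx : toIdx (nCols mat0) (toCell (nCols mat0) u) = u := toIdx_toCell _ u
  by_cases hd : fbit q2 u = true
  · have hdA : (p1, p2).2.contains (toCell (nCols mat0) u) = true := by
      show p2.contains _ = true
      exact List.contains_iff_mem.2 ((hdone _ hc0).2 (by rw [hidx]; exact hd))
    have hA : stepA (p1, p2) (toCell (nCols mat0) u) = (p1, p2) := by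
      unfold stepA
      rw [if_pos hdA]
    have hB : stepF mat0.length (nCols mat0) (p1.flatten, q2) u = (p1.flatten, q2) := by
      unfold stepF
      rw [if_pos (show fbit (p1.flatten, q2).2 u = true from hd)]
    rw [hA, hB]
    exact ⟨rfl, hdm, hlen2, hdone⟩
  · have hdA : ¬(p2.contains (toCell (nCols mat0) u) = true) := by
      intro hcon
      exact hd (by rw [← hidx]; exact (hdone _ hc0).1 (List.contains_iff_mem.1 hcon))
    rw [stepA_eq p1 p2 _ hdA, stepF_eq mat0.length (nCols mat0) p1.flatten q2 u hd]
    -- closure facts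
    obtain ⟨⟨hlc, hlr, hlcl, hstart, hvalc, hrowc, hcolc, hmin⟩, hstab⟩ :=
      cl_spec mat0 p1 hrect hdm u hu
    set cl := clTerm p1.flatten mat0.length (nCols mat0) u (fget p1.flatten u) with hcldef
    set Lc := ((List.range (mat0.length * nCols mat0)).filter
        (fun w => fbit cl.comp w)).map (toCell (nCols mat0)) with hLcdef
    have hmemLc : ∀ x, x ∈ Lc ↔ ∃ w, fbit cl.comp w = true ∧ toCell (nCols mat0) w = x := by
      intro x
      rw [hLcdef]
      simp only [List.mem_map, List.mem_filter, List.mem_range]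
      constructor
      · rintro ⟨w, ⟨_, hw2⟩, rfl⟩
        exact ⟨w, hw2, rfl⟩
      · rintro ⟨w, hw, rfl⟩
        refine ⟨w, ⟨?_, hw⟩, rfl⟩
        have := fbit_lt _ _ hw
        rwa [hlc, hnm] at this
    have hvmat : fget p1.flatten u = matVal p1 (toCell (nCols mat0) u) :=
      fget_flatten (nCols mat0) hMpos p1 hrows u
    obtain ⟨hcompA, hprevA⟩ := find_twins_spec p1 (toCell (nCols mat0) u) hrm hc0'
    rw [← hvmat] at hcompA hprevA
    have hcompB : IsComp p1 (fget p1.flatten u) (toCell (nCols mat0) u) Lc := by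
      refine ⟨(hmemLc _).2 ⟨u, hstart, rfl⟩, ?_, ?_, ?_⟩
      · intro c hc
        obtain ⟨w, hw, rfl⟩ := (hmemLc _).1 hc
        have hwlt : w < mat0.length * nCols mat0 := by
          have := fbit_lt _ _ hw
          rwa [hlc, hnm] at this
        refine ⟨⟨?_, ?_⟩, hvalc w hw⟩
        · rw [hlen1]
          exact toCell_fst_lt _ _ _ hwlt
        · rw [hnCp1]
          exact toCell_snd_lt _ _ hMpos
      · intro t ht c hc hcv hline
        obtain ⟨w0, hw0, hw0e⟩ := (hmemLc t).1 ht
        have hc1 : c.1 < mat0.length := by rw [← hlen1]; exact hc.1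
        have hc2 : c.2 < nCols mat0 := by rw [← hnCp1]; exact hc.2
        have hwc : toIdx (nCols mat0) c < mat0.length * nCols mat0 := toIdx_lt _ _ c hc1 hc2
        have hccell : toCell (nCols mat0) (toIdx (nCols mat0) c) = c := toCell_toIdx _ c hc2
        by_cases hin : fbit cl.comp (toIdx (nCols mat0) c) = true
        · exact (hmemLc c).2 ⟨toIdx (nCols mat0) c, hin, hccell⟩
        · exfalso
          apply hstab (toIdx (nCols mat0) c) hwc
          refine ⟨?_, by simpa using hin, ?_⟩
          · rw [fget_flatten (nCols mat0) hMpos p1 hrows, hccell]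
            exact hcv
          · have hdivc : toIdx (nCols mat0) c / nCols mat0 = c.1 := congrArg Prod.fst hccell
            have hmodc : toIdx (nCols mat0) c % nCols mat0 = c.2 := congrArg Prod.snd hccell
            rcases hline with h1 | h2
            · left
              rw [hdivc]
              refine (hrowc c.1).2 ⟨w0, hw0, ?_⟩
              rw [show w0 / nCols mat0 = (toCell (nCols mat0) w0).1 from rfl, hw0e]
              exact h1
            · right
              rw [hmodc]
              refine (hcolc c.2).2 ⟨w0, hw0, ?_⟩
              rw [show w0 % nCols mat0 = (toCell (nCols mat0) w0).2 from rfl, hw0e]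
              exact h2
      · intro T hT hcl' c hc
        obtain ⟨w, hw, rfl⟩ := (hmemLc _).1 hc
        exact hmin T hT hcl' w hw
    have hmemeq := IsComp_unique p1 (fget p1.flatten u) (toCell (nCols mat0) u) hcompA hcompB
    have hprevB : fPrev p1.flatten (fget p1.flatten u) (mat0.length * nCols mat0) (nCols mat0)
        cl.rowact cl.colact = groupPrev p1 (fget p1.flatten u) Lc := by
      have h0 := fPrev_eq p1 (nCols mat0) hMpos hrows (fget p1.flatten u)
        cl.comp cl.rowact cl.colact hlc hrowc hcolc
      rw [hnm] at h0
      rw [hLcdef]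
      exact h0
    have hpe : (find_twins_with_prev (toCell (nCols mat0) u) p1).2 =
        fPrev p1.flatten (fget p1.flatten u) (mat0.length * nCols mat0) (nCols mat0)
          cl.rowact cl.colact := by
      rw [hprevA, hprevB]
      exact groupPrev_congr p1 _ hmemeq
    have hnv : nvTerm p1.flatten mat0.length (nCols mat0) u =
        (match (find_twins_with_prev (toCell (nCols mat0) u) p1).2 with
          | some p => p + 1 | none => (1 : Int)) := by
      unfold nvTerm
      rw [← hcldef, ← hpe]
      cases (find_twins_with_prev (toCell (nCols mat0) u) p1).2 <;> rfl
    -- membership of cells of the component, flat vs pairs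
    have hcompIdx : ∀ c, inRM mat0 c →
        (c ∈ (find_twins_with_prev (toCell (nCols mat0) u) p1).1 ↔
          fbit cl.comp (toIdx (nCols mat0) c) = true) := by
      intro c hc
      rw [hmemeq c, hmemLc c]
      constructor
      · rintro ⟨w, hw, rfl⟩
        rwa [toIdx_toCell]
      · intro hbit
        exact ⟨toIdx (nCols mat0) c, hbit, toCell_toIdx _ c hc.2⟩
    -- write loops
    have hboundA : ∀ c ∈ (find_twins_with_prev (toCell (nCols mat0) u) p1).1,
        c.1 < (p1, p2).1.length ∧ c.2 < ((p1, p2).1.getD c.1 []).length := by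
      intro c hc
      have hin := (hcompA.2.1 c hc).1
      refine ⟨hin.1, ?_⟩
      rw [rowlen p1 hrm hin.1]
      exact hin.2
    obtain ⟨a1, a2, a3, a4⟩ := writeA_spec
      (match (find_twins_with_prev (toCell (nCols mat0) u) p1).2 with
        | some p => p + 1 | none => (1 : Int))
      (find_twins_with_prev (toCell (nCols mat0) u) p1).1 (p1, p2) hboundA
    obtain ⟨b1, b2, b3, b4⟩ := fwrite_spec cl.comp (nvTerm p1.flatten mat0.length (nCols mat0) u)
      (List.range (mat0.length * nCols mat0)) (p1.flatten, q2)
      (by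
        intro w hw
        have := fbit_lt _ _ hw
        rw [hlc, hnm] at this
        constructor
        · show w < p1.flatten.length
          rw [hflen]
          exact this
        · show w < q2.length
          rw [hlen2]
          exact this)
    -- conclude OInvF
    dsimp only at a1 a2 a3 a4 b1 b2 b3 b4
    have hdmA := MDims_comp hdm a1
    have hrowsA := MDims_rows mat0 _ hrect hdmA
    refine ⟨?_, hdmA, ?_, ?_⟩
    · -- flat result = flatten of matrix result
      apply intlist_ext
      · rw [b1, hflen, flatten_length _ (nCols mat0) hrowsA, hdmA.1]
      · intro w
        rw [b3 w, fget_flatten (nCols mat0) hMpos _ hrowsA w]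
        by_cases hcw : fbit cl.comp w = true
        · have hwlt : w < mat0.length * nCols mat0 := by
            have := fbit_lt _ _ hcw
            rwa [hlc, hnm] at this
          rw [if_pos ⟨List.mem_range.2 hwlt, hcw⟩]
          have htw : toCell (nCols mat0) w ∈ (find_twins_with_prev (toCell (nCols mat0) u) p1).1 :=
            (hmemeq _).2 ((hmemLc _).2 ⟨w, hcw, rfl⟩)
          rw [a3 _ htw]
          exact hnv
        · have hcw' : fbit cl.comp w = false := by simpa using hcw
          rw [if_neg (by rintro ⟨_, hc⟩; rw [hcw'] at hc; exact Bool.noConfusion hc)]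
          have hntw : toCell (nCols mat0) w ∉ (find_twins_with_prev (toCell (nCols mat0) u) p1).1 := by
            intro htw
            obtain ⟨w0, hw0, hw0e⟩ := (hmemLc _).1 ((hmemeq _).1 htw)
            have hw0lt : w0 < mat0.length * nCols mat0 := by
              have := fbit_lt _ _ hw0
              rwa [hlc, hnm] at this
            by_cases hwlt : w < mat0.length * nCols mat0
            · have hww : w0 = w := by
                have := congrArg (toIdx (nCols mat0)) hw0e
                rwa [toIdx_toCell, toIdx_toCell] at this
              rw [hww, hcw'] at hw0
              exact Bool.noConfusion hw0
            · have hge : mat0.length ≤ (toCell (nCols mat0) w).1 :=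
                toCell_ge mat0.length (nCols mat0) w hMpos (Nat.le_of_not_lt hwlt)
              have hlt2 : (toCell (nCols mat0) w0).1 < mat0.length := toCell_fst_lt _ _ _ hw0lt
              rw [hw0e] at hlt2
              omega
          rw [a2 _ hntw]
          exact fget_flatten (nCols mat0) hMpos p1 hrows w
    · rw [b2]
      exact hlen2
    · intro c hc
      have hcIdx : toIdx (nCols mat0) c < mat0.length * nCols mat0 := toIdx_lt _ _ c hc.1 hc.2
      have hb := b4 (toIdx (nCols mat0) c)
      constructor
      · intro hmem
        rw [hb]
        rcases (a4 c).1 hmem with hold | htw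
        · rw [(hdone c hc).1 hold]
          simp
        · rw [(hcompIdx c hc).1 htw]
          simp [List.mem_range.2 hcIdx]
      · intro hbit
        rw [hb] at hbit
        rw [Bool.or_eq_true] at hbit
        rcases hbit with h1 | h1
        · exact (a4 c).2 (Or.inl ((hdone c hc).2 h1))
        · rw [Bool.and_eq_true] at h1
          exact (a4 c).2 (Or.inr ((hcompIdx c hc).2 h1.2))

theorem outer_foldF (mat0 : List (List Int))
    (hrect : ∀ r ∈ mat0, r.length = (mat0.headD []).length) :
    ∀ (us : List Nat), (∀ u ∈ us, u < mat0.length * nCols mat0) →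
    ∀ p q, OInvF mat0 p q →
      OInvF mat0 (us.foldl (fun p u => stepA p (toCell (nCols mat0) u)) p)
        (us.foldl (stepF mat0.length (nCols mat0)) q) := by
  intro us
  induction us with
  | nil => intro _ p q h; exact h
  | cons u us ih =>
    intro hus p q h
    simp only [List.foldl_cons]
    exact ih (fun x hx => hus x (List.mem_cons_of_mem _ hx)) _ _
      (stepAB mat0 hrect u (hus u List.mem_cons_self) p q h)

theorem init_OInvF (mat : List (List Int)) :
    OInvF mat (mat, PySem.Set.empty)
      (mat.flatten, List.replicate (mat.length * nCols mat) false) := by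
  refine ⟨rfl, MDims_refl mat, by simp, ?_⟩
  intro c hc
  constructor
  · intro h
    exact absurd h List.not_mem_nil
  · intro h
    rw [show fbit (mat.flatten, List.replicate (mat.length * nCols mat) false).2
        (toIdx (nCols mat) c) = false from fbit_replicate _ _] at h
    exact Bool.noConfusion h

theorem compress_eq (mat : List (List Int))
    (hrect : ∀ r ∈ mat, r.length = (mat.headD []).length) :
    compress_2d mat = compress_2d_alt mat := by
  have hMrows : ∀ r ∈ mat, r.length = nCols mat := hrect
  -- A side reduced to a fold of stepA over the sorted cells
  have h1 : compress_2d mat =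
      ((PySem.List.sorted (cells mat) (fun c => matVal mat c)).foldl stepA
        (mat, PySem.Set.empty)).1 := by
    unfold compress_2d
    rw [linearize_eq, sorted_map_fst (fun c => (c, matVal mat c)) (fun x => x.2) (cells mat)]
    rw [List.foldl_map]
    rfl
  -- B side, lets unfolded
  have h2 : compress_2d_alt mat =
      (List.range mat.length).map (fun i =>
        PySem.List.slice
          ((PySem.List.sorted (List.range (mat.length * nCols mat))
              (fun u => fget mat.flatten u)).foldl
            (stepF mat.length (nCols mat))
            (mat.flatten, List.replicate (mat.length * nCols mat) false)).1
          (some ((i * nCols mat : Nat) : Int))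
          (some (((i * nCols mat : Nat) : Int) + ((nCols mat : Nat) : Int)))) := rfl
  have hcells : cells mat = (List.range (mat.length * nCols mat)).map (toCell (nCols mat)) :=
    cells_eq mat (nCols mat) hMrows
  by_cases hMpos : 0 < nCols mat
  · have hsorted : PySem.List.sorted (cells mat) (fun c => matVal mat c)
        = (PySem.List.sorted (List.range (mat.length * nCols mat))
            (fun u => fget mat.flatten u)).map (toCell (nCols mat)) := by
      rw [hcells, sorted_map_fst (toCell (nCols mat)) (fun c => matVal mat c)]
      have hk : (fun a => matVal mat (toCell (nCols mat) a)) =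
          (fun u => fget mat.flatten u) := by
        funext u
        exact (fget_flatten (nCols mat) hMpos mat hMrows u).symm
      rw [hk]
    rw [h1, hsorted, List.foldl_map, h2]
    have hmem : ∀ u ∈ PySem.List.sorted (List.range (mat.length * nCols mat))
        (fun u => fget mat.flatten u), u < mat.length * nCols mat := by
      intro u hu
      rw [PySem.List.mem_sorted] at hu
      exact List.mem_range.1 hu
    obtain ⟨hq1, hdm, _, _⟩ := outer_foldF mat hrect _ hmem (mat, PySem.Set.empty)
      (mat.flatten, List.replicate (mat.length * nCols mat) false) (init_OInvF mat)
    have hrowsP := MDims_rows mat _ hrect hdm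
    have hU := unflatten_eq _ (nCols mat) hrowsP
    rw [hdm.1] at hU
    rw [hq1]
    simp only [PySem.List.slice_natCast_add]
    exact hU.symm
  · -- nCols mat = 0: the matrix has no cells; both sides return mat (a list of empty rows)
    have hM0 : nCols mat = 0 := by omega
    have hnm0 : mat.length * nCols mat = 0 := by rw [hM0, Nat.mul_zero]
    have hcnil : cells mat = [] := by
      rw [hcells, hnm0]
      rfl
    have hsortA : PySem.List.sorted (cells mat) (fun c => matVal mat c) = [] := by
      rw [hcnil, PySem.List.sorted_eq_foldl_insertBy]
      rfl
    have hsortB : PySem.List.sorted (List.range (mat.length * nCols mat))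
        (fun u => fget mat.flatten u) = [] := by
      rw [hnm0, PySem.List.sorted_eq_foldl_insertBy]
      rfl
    rw [h1, hsortA, h2, hsortB]
    simp only [List.foldl_nil]
    simp only [PySem.List.slice_natCast_add]
    apply Eq.symm
    apply List.ext_getElem (by simp)
    intro i hi hi'
    simp only [List.getElem_map, List.getElem_range]
    have : mat[i].length = 0 := by
      rw [hMrows mat[i] (List.getElem_mem (by simpa using hi')), hM0]
    rw [List.eq_nil_of_length_eq_zero this]
    simp [hM0]

-- ===== VERDICT (by name: the statement is the Claim_ definition above) =====
theorem compress_2d_spec : Claim_equal_compress_2d := by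
  intro mat _ hpre
  unfold Spec_compress_2d
  exact compress_eq mat hpre
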